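-- pv_equiv track=rewrite | github.com/majormunky/advent_of_code | 2024/python/day03.py | find_muls_part2
-- ===== SOURCE A (Python) =====
-- def find_arguments(instruction):
--     args = []
--     status = "first"
--     tmp_num = ""
--     # skip over mul(
--     for i in instruction[4:]:
--         if i.isdigit():
--             tmp_num += i
--         elif i == ",":
--             if status == "first" and len(tmp_num):
--                 args.append(int(tmp_num))
--                 tmp_num = ""
--                 status = "second"
--             else:
--                 return False
--         elif i == ")":
--             if status == "second" and len(tmp_num):
--                 args.append(int(tmp_num))
--                 return args
--         else:
--             return False
--     return False
--
-- def find_muls_part2(instructions, mul_enabled):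
--     inst_len = len(instructions)
--
--     result = []
--
--     for i in range(inst_len):
--         char = instructions[i]
--         if char == "d":
--             # check for do or don't
--             if instructions[i:].startswith("do()"):
--                 mul_enabled = True
--             elif instructions[i:].startswith("don't()"):
--                 mul_enabled = False
--         elif char == "m":
--             # check if we have a mul(
--             if instructions[i:].startswith("mul(") and mul_enabled:
--                 args = find_arguments(instructions[i:])
--                 if args:
--                     result.append(args)
--     return result, mul_enabled
-- ===== SOURCE B (Python) =====
-- import re
--
-- # Single combined pattern: a mul instruction with plain digit arguments, or a toggle.
-- _PATTERN = re.compile(r"mul\((\d+),(\d+)\)|do\(\)|don't\(\)")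
--
-- def find_muls_part2(instructions, mul_enabled):
--     result = []
--     for m in _PATTERN.finditer(instructions):
--         token = m.group(0)
--         if token == "do()":
--             mul_enabled = True
--         elif token == "don't()":
--             mul_enabled = False
--         elif mul_enabled:
--             result.append([int(m.group(1)), int(m.group(2))])
--     return result, mul_enabled
-- ===== Notes on version B (the rewrite author's own statement) =====
-- stated objective: faster
-- what changed: A rescans the string at every index with startswith checks plus a hand-written find_arguments state machine over a fresh instructions[i:] slice; B makes a single left-to-right pass with one compiled regex (re.finditer over mul\((\d+),(\d+)\)|do()|don't()), toggling the enabled flag on do()/don't() matches.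
-- intended difference: On inputs containing, at a position where muls are enabled, a malformed mul whose arguments have stray ')' characters interleaved among the digits (e.g. 'mul(1),2)'), A silently skips the ')'s and returns the digit pair ([[1,2]]) while B ignores the malformed instruction ([]); B's is the intended value since the puzzle grammar is mul(digits,digits). — e.g. on find_muls_part2("mul(1),2)", true): A returns ([[1, 2]], true), B returns ([], true)
import Mathlib
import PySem

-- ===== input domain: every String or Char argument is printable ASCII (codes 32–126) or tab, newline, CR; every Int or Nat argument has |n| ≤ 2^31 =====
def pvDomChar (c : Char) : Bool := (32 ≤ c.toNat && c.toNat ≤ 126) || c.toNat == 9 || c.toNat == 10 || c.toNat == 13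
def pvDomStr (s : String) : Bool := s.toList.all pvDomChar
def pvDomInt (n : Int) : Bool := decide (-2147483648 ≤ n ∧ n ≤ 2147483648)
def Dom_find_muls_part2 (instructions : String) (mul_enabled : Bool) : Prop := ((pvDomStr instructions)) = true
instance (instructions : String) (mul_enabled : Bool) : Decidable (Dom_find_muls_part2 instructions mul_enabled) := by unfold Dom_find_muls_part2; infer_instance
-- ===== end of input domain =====

-- B replaces A's per-index rescan (outer char loop + find_arguments state machine) by a single
-- left-to-right pass over one combined regex (finditer in Source B); on malformed muls with stray ')'
-- inside the arguments A returns the digit pair while B ignores them (see D_ below).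

-- ===== PORT A =====
-- the 'for i in instruction[4:]' loop of find_arguments, with its early returns;
-- int(tmp_num): tmp_num is a nonempty run of digit chars, so ofChars? is some and .getD 0 is exact
def find_arguments_loop (cs : List Char) (args : List Int) (status : String) (tmp : List Char) : Option (List Int) :=
  match cs with
  | [] => none
  | c :: rest =>
    if PySem.Chars.isdigit c then
      find_arguments_loop rest args status (tmp ++ [c])
    else if c = ',' then
      if status = "first" ∧ tmp ≠ [] then
        find_arguments_loop rest (args ++ [(PySem.Int.ofChars? tmp).getD 0]) "second" []
      else none
    else if c = ')' then
      if status = "second" ∧ tmp ≠ [] then some (args ++ [(PySem.Int.ofChars? tmp).getD 0])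
      else find_arguments_loop rest args status tmp
    else none

-- Python's find_arguments: False → none, an argument list → some
def find_arguments (instruction : List Char) : Option (List Int) :=
  find_arguments_loop (PySem.List.slice instruction (some 4) none) [] "first" []

-- the body of A's 'for i in range(inst_len)' loop
def find_muls_step (cs : List Char) (st : List (List Int) × Bool) (i : Int) : List (List Int) × Bool :=
  match PySem.List.pyGet? cs i with
  | none => st
  | some char =>
    if char = 'd' then
      if PySem.Chars.startswith (PySem.List.slice cs (some i) none) "do()".toList then (st.1, true)
      else if PySem.Chars.startswith (PySem.List.slice cs (some i) none) "don't()".toList then (st.1, false)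
      else st
    else if char = 'm' then
      if PySem.Chars.startswith (PySem.List.slice cs (some i) none) "mul(".toList ∧ st.2 then
        match find_arguments (PySem.List.slice cs (some i) none) with
        | some args => (st.1 ++ [args], st.2)
        | none => st
      else st
    else st

def find_muls_part2 (instructions : String) (mul_enabled : Bool) : List (List Int) × Bool :=
  (PySem.List.pyRange 0 (PySem.Str.len instructions) 1).foldl
    (find_muls_step instructions.toList) ([], mul_enabled)

-- ===== PORT B =====
-- Hand-written matcher for Source B's regex alternative  mul\((\d+),(\d+)\)  at the start of cs
-- (Lean has no regex engine; this matcher is exact for that pattern: \d+ is a maximal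
-- nonempty digit run, the following literal ',' / ')' must then be present).
def matchMulS (cs : List Char) : Option (List Int × List Char) :=
  if cs.take 4 = "mul(".toList then
    let d1 := (cs.drop 4).takeWhile PySem.Chars.isdigit
    if d1 = [] then none
    else
      match (cs.drop 4).dropWhile PySem.Chars.isdigit with
      | c0 :: r2 =>
        if c0 = ',' then
          let d2 := r2.takeWhile PySem.Chars.isdigit
          if d2 = [] then none
          else
            match r2.dropWhile PySem.Chars.isdigit with
            | c1 :: rest =>
              if c1 = ')' then
                some ([(PySem.Int.ofChars? d1).getD 0, (PySem.Int.ofChars? d2).getD 0], rest)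
              else none
            | [] => none
        else none
      | [] => none
  else none

-- a successful mul match consumes at least 8 characters (used for scanS's termination)
lemma matchMulS_rest_lt {cs : List Char} {args : List Int} {rest : List Char}
    (h : matchMulS cs = some (args, rest)) : rest.length + 8 ≤ cs.length := by
  unfold matchMulS at h
  by_cases h4 : cs.take 4 = "mul(".toList
  swap
  · rw [if_neg h4] at h; exact absurd h (by simp)
  rw [if_pos h4] at h
  simp only at h
  by_cases hd1 : (cs.drop 4).takeWhile PySem.Chars.isdigit = []
  · rw [if_pos hd1] at h; exact absurd h (by simp)
  rw [if_neg hd1] at h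
  rcases hw : (cs.drop 4).dropWhile PySem.Chars.isdigit with _ | ⟨c0, r2⟩ <;> rw [hw] at h
  · exact absurd h (by simp)
  by_cases hc0 : c0 = ','
  swap
  · simp [hc0] at h
  subst hc0
  simp only [if_true, ite_true, reduceIte] at h
  by_cases hd2 : r2.takeWhile PySem.Chars.isdigit = []
  · rw [if_pos hd2] at h; exact absurd h (by simp)
  rw [if_neg hd2] at h
  rcases hw2 : r2.dropWhile PySem.Chars.isdigit with _ | ⟨c1, rest'⟩ <;> rw [hw2] at h
  · exact absurd h (by simp)
  by_cases hc1 : c1 = ')'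
  swap
  · simp [hc1] at h
  subst hc1
  simp only [if_true, ite_true, reduceIte] at h
  obtain rfl : rest' = rest := congrArg Prod.snd (Option.some.inj h)
  have hlen4 : 4 ≤ cs.length := by
    have := congrArg List.length h4
    rw [List.length_take] at this
    simp at this; omega
  have e1 : (cs.drop 4).takeWhile PySem.Chars.isdigit ++ (cs.drop 4).dropWhile PySem.Chars.isdigit = cs.drop 4 :=
    List.takeWhile_append_dropWhile
  have e2 : r2.takeWhile PySem.Chars.isdigit ++ r2.dropWhile PySem.Chars.isdigit = r2 :=
    List.takeWhile_append_dropWhile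
  have l1 := congrArg List.length e1
  have l2 := congrArg List.length e2
  rw [hw] at l1
  rw [hw2] at l2
  have p1 : 0 < ((cs.drop 4).takeWhile PySem.Chars.isdigit).length := List.length_pos_of_ne_nil hd1
  have p2 : 0 < (r2.takeWhile PySem.Chars.isdigit).length := List.length_pos_of_ne_nil hd2
  simp [List.length_append, List.length_drop] at l1 l2
  omega

-- Source B's finditer loop: at each position try the combined pattern (mul alternative first,
-- then do()/don't(), which start with a different character), jump over a match, else advance one
def scanS : List Char → List (List Int) → Bool → List (List Int) × Bool
  | [], result, en => (result, en)
  | c :: cs, result, en =>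
    match h : matchMulS (c :: cs) with
    | some (args, rest) => scanS rest (if en then result ++ [args] else result) en
    | none =>
      if (c :: cs).take 4 = "do()".toList then scanS (cs.drop 3) result true
      else if (c :: cs).take 7 = "don't()".toList then scanS (cs.drop 6) result false
      else scanS cs result en
termination_by cs _ _ => cs.length
decreasing_by
  · have h5 := matchMulS_rest_lt h
    simp at h5 ⊢
    omega
  · simp
  · simp
  · simp

def find_muls_part2_alt (instructions : String) (mul_enabled : Bool) : List (List Int) × Bool :=
  scanS instructions.toList [] mul_enabled

-- ===== PRECONDITION & SPEC =====
-- helpers for D_ (shape conditions on the raw input; they reference neither port):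
def pvPD (c : Char) : Bool := PySem.Chars.isdigit c || c == ')'

-- a malformed mul at this position: A's hand-parser accepts it ("mul(", a digit/')' run with a
-- digit, ',', then a digit/')' run with a ')' after a digit) and a stray ')' sits in the arguments
def quirkAt (cs : List Char) : Bool :=
  cs.take 4 == "mul(".toList &&
    (let a := (cs.drop 4).span pvPD
     let w := (a.2.drop 1).takeWhile pvPD
     a.1.any PySem.Chars.isdigit && a.2.head? == some ',' &&
       ((w.dropWhile (!PySem.Chars.isdigit ·)).contains ')' &&
         (a.1.contains ')' || w.head? == some ')')))

-- one pass over the suffixes, tracking the do()/don't() toggle state, looking for an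
-- enabled malformed mul
def quirkScan : List Char → Bool → Bool
  | [], _ => false
  | c :: t, e =>
    if e && quirkAt (c :: t) then true
    else
      quirkScan t
        (if "do()".toList.isPrefixOf (c :: t) then true
         else if "don't()".toList.isPrefixOf (c :: t) then false
         else e)

-- On inputs containing, at a position where muls are enabled, a malformed mul whose arguments have
-- stray ')' characters interleaved among the digits (e.g. "mul(1),2)"), A silently skips the ')'s
-- and returns the digit pair ([[1,2]]) while B ignores the malformed instruction ([]); B's is the
-- intended value since the puzzle grammar is mul(digits,digits).
def D_find_muls_part2 (instructions : String) (mul_enabled : Bool) : Prop :=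
  quirkScan instructions.toList mul_enabled = true
instance (instructions : String) (mul_enabled : Bool) : Decidable (D_find_muls_part2 instructions mul_enabled) := by unfold D_find_muls_part2; infer_instance

def Spec_find_muls_part2 (instructions : String) (mul_enabled : Bool) (out : List (List Int) × Bool) : Prop := ¬ D_find_muls_part2 instructions mul_enabled → out = find_muls_part2_alt instructions mul_enabled
instance (instructions : String) (mul_enabled : Bool) (out : List (List Int) × Bool) : Decidable (Spec_find_muls_part2 instructions mul_enabled out) := by unfold Spec_find_muls_part2; infer_instance

def pvDiffWitness_find_muls_part2 : String × Bool := ("mul(1),2)", true)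
def pvDiffWitnessOut_find_muls_part2 : (List (List Int) × Bool) × (List (List Int) × Bool) :=
  (([[1, 2]], true), ([], true))

-- ===== CLAIM (what is proved, stated in full; the proofs are below) =====
def Claim_unchanged_find_muls_part2 : Prop := ∀ (instructions : String) (mul_enabled : Bool), Dom_find_muls_part2 instructions mul_enabled → Spec_find_muls_part2 instructions mul_enabled (find_muls_part2 instructions mul_enabled)
def Claim_changed_find_muls_part2 : Prop := Dom_find_muls_part2 (pvDiffWitness_find_muls_part2.1) (pvDiffWitness_find_muls_part2.2) ∧ D_find_muls_part2 (pvDiffWitness_find_muls_part2.1) (pvDiffWitness_find_muls_part2.2) ∧ find_muls_part2 (pvDiffWitness_find_muls_part2.1) (pvDiffWitness_find_muls_part2.2) = pvDiffWitnessOut_find_muls_part2.1 ∧ find_muls_part2_alt (pvDiffWitness_find_muls_part2.1) (pvDiffWitness_find_muls_part2.2) = pvDiffWitnessOut_find_muls_part2.2 ∧ pvDiffWitnessOut_find_muls_part2.1 ≠ pvDiffWitnessOut_find_muls_part2.2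
def Claim_exact_find_muls_part2 : Prop := ∀ (instructions : String) (mul_enabled : Bool), Dom_find_muls_part2 instructions mul_enabled → D_find_muls_part2 instructions mul_enabled → find_muls_part2 instructions mul_enabled ≠ find_muls_part2_alt instructions mul_enabled

-- ===== LEMMAS AND PROOFS =====
-- A characterisation of A in the same one-pass shape (scanL over A's lenient grammar) is built
-- first; Claim_unchanged then compares scanL with the port's scanS outside D_.

-- scanArg1 = A's phase-1 state machine (digits collected, ')' skipped, stop elsewhere)
def scanArg1 (cs : List Char) (acc : List Char) : List Char × List Char :=
  match cs with
  | [] => (acc, [])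
  | c :: rest =>
    if PySem.Chars.isdigit c then scanArg1 rest (acc ++ [c])
    else if c = ')' then scanArg1 rest acc
    else (acc, c :: rest)

-- A's accepted (lenient) mul grammar at the start of cs, as a one-shot matcher
def matchMul (cs : List Char) : Option (List Int × List Char) :=
  if cs.take 4 = "mul(".toList then
    let p := scanArg1 (cs.drop 4) []
    match p.2 with
    | [] => none
    | c0 :: r2 =>
      if c0 = ',' then
        if p.1 = [] then none
        else
          let d2 := (r2.dropWhile (· = ')')).takeWhile PySem.Chars.isdigit
          if d2 = [] then none
          else
            match (r2.dropWhile (· = ')')).dropWhile PySem.Chars.isdigit with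
            | c1 :: rest =>
              if c1 = ')' then
                some ([(PySem.Int.ofChars? p.1).getD 0, (PySem.Int.ofChars? d2).getD 0], rest)
              else none
            | [] => none
      else none
  else none

-- digits are never 'm' or 'd' (used to show matched regions are inert for A's loop)
lemma isdigit_ne_md {c : Char} (h : PySem.Chars.isdigit c = true) : c ≠ 'm' ∧ c ≠ 'd' := by
  constructor <;> rintro rfl <;> revert h <;> decide

-- structure of a successful match
lemma scanArg1_decomp (cs : List Char) : ∀ acc, ∃ con, cs = con ++ (scanArg1 cs acc).2 ∧
    ∀ c ∈ con, PySem.Chars.isdigit c = true ∨ c = ')' := by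
  induction cs with
  | nil => intro acc; exact ⟨[], by simp [scanArg1]⟩
  | cons c rest ih =>
    intro acc
    by_cases h1 : PySem.Chars.isdigit c = true
    · obtain ⟨con, hcon, hmem⟩ := ih (acc ++ [c])
      refine ⟨c :: con, ?_, ?_⟩
      · simp [scanArg1, h1, ← hcon]
      · intro x hx
        rcases List.mem_cons.1 hx with rfl | hx
        · exact Or.inl h1
        · exact hmem x hx
    · by_cases h2 : c = ')'
      · obtain ⟨con, hcon, hmem⟩ := ih acc
        refine ⟨c :: con, ?_, ?_⟩
        · subst h2
          simp [scanArg1, show PySem.Chars.isdigit ')' = false from by decide, ← hcon]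
        · intro x hx
          rcases List.mem_cons.1 hx with rfl | hx
          · exact Or.inr h2
          · exact hmem x hx
      · exact ⟨[], by simp [scanArg1, h1, h2]⟩

lemma matchMul_spec {cs : List Char} {args : List Int} {rest : List Char}
    (h : matchMul cs = some (args, rest)) :
    cs.take 4 = "mul(".toList ∧ ∃ pre, cs = pre ++ rest ∧ 5 ≤ pre.length ∧
      ∀ c ∈ pre.drop 1, c ≠ 'm' ∧ c ≠ 'd' := by
  by_cases h4 : cs.take 4 = "mul(".toList
  swap
  · unfold matchMul at h; rw [if_neg h4] at h; exact absurd h (by simp)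
  refine ⟨h4, ?_⟩
  unfold matchMul at h
  rw [if_pos h4] at h
  obtain ⟨con, hcon, hconmem⟩ := scanArg1_decomp (cs.drop 4) []
  rcases hs : scanArg1 (cs.drop 4) [] with ⟨d1, r1⟩
  rw [hs] at h hcon
  simp only at h hcon
  cases r1 with
  | nil => simp at h
  | cons c0 r2 =>
    by_cases hc0 : c0 = ','
    swap
    · simp only [hc0, if_neg, ite_false] at h
      exact absurd h (by simp [hc0])
    subst hc0
    simp only [if_true, ite_true, reduceIte] at h
    by_cases hd1 : d1 = []
    · rw [if_pos hd1] at h; exact absurd h (by simp)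
    rw [if_neg hd1] at h
    by_cases htw : (r2.dropWhile (· = ')')).takeWhile PySem.Chars.isdigit = []
    · rw [if_pos htw] at h; exact absurd h (by simp)
    rw [if_neg htw] at h
    rcases hdw : (r2.dropWhile (· = ')')).dropWhile PySem.Chars.isdigit with _ | ⟨c1, rest'⟩ <;>
      rw [hdw] at h
    · exact absurd h (by simp)
    by_cases hc1 : c1 = ')'
    swap
    · simp [hc1] at h
    subst hc1
    have hrest : rest' = rest := congrArg Prod.snd (Option.some.inj h)
    subst hrest
    refine ⟨"mul(".toList ++ con ++ [','] ++ r2.takeWhile (· = ')')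
        ++ (r2.dropWhile (· = ')')).takeWhile PySem.Chars.isdigit ++ [')'], ?_, ?_, ?_⟩
    · have e1 : r2.takeWhile (· = ')') ++ r2.dropWhile (· = ')') = r2 :=
        List.takeWhile_append_dropWhile
      have e2 : (r2.dropWhile (· = ')')).takeWhile PySem.Chars.isdigit
          ++ (r2.dropWhile (· = ')')).dropWhile PySem.Chars.isdigit = r2.dropWhile (· = ')') :=
        List.takeWhile_append_dropWhile
      conv_lhs => rw [← List.take_append_drop 4 cs, h4, hcon]
      conv_lhs => rw [← e1, ← e2, hdw]
      simp
    · simp; omega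
    · intro c hc
      simp only [List.append_assoc,
        List.drop_append_of_le_length (by decide : (1:Nat) ≤ "mul(".toList.length)] at hc
      rw [show "mul(".toList.drop 1 = ['u', 'l', '('] from by decide] at hc
      have hcases : c = 'u' ∨ c = 'l' ∨ c = '(' ∨ c ∈ con ∨ c = ','
          ∨ c ∈ r2.takeWhile (· = ')')
          ∨ c ∈ (r2.dropWhile (· = ')')).takeWhile PySem.Chars.isdigit ∨ c = ')' := by
        simp only [List.mem_append, List.mem_cons, List.not_mem_nil, or_false] at hc
        tauto
      rcases hcases with rfl | rfl | rfl | hx | rfl | hx | hx | rfl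
      · decide
      · decide
      · decide
      · rcases hconmem c hx with hdig | rfl
        · exact isdigit_ne_md hdig
        · decide
      · decide
      · have h3 : c = ')' := by simpa using List.mem_takeWhile_imp hx
        subst h3; decide
      · exact isdigit_ne_md (List.mem_takeWhile_imp hx)
      · decide

lemma matchMul_rest_lt {cs : List Char} {args : List Int} {rest : List Char}
    (h : matchMul cs = some (args, rest)) : rest.length + 5 ≤ cs.length := by
  obtain ⟨-, pre, hcs, hlen, -⟩ := matchMul_spec h
  have := congrArg List.length hcs
  simp [List.length_append] at this
  omega

-- one-pass scan over A's lenient grammar (proof-internal characterisation of A)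
def scanL : List Char → List (List Int) → Bool → List (List Int) × Bool
  | [], result, en => (result, en)
  | c :: cs, result, en =>
    if (c :: cs).take 4 = "do()".toList then scanL (cs.drop 3) result true
    else if (c :: cs).take 7 = "don't()".toList then scanL (cs.drop 6) result false
    else
      match h : matchMul (c :: cs) with
      | some (args, rest) => scanL rest (if en then result ++ [args] else result) en
      | none => scanL cs result en
termination_by cs _ _ => cs.length
decreasing_by
  · simp
  · simp
  · have h5 := matchMul_rest_lt h
    simp at h5
    simp
    omega
  · simp

-- phase 2 of A's state machine, digits already seen (tmp ≠ [])
lemma P2b (r : List Char) : ∀ (args : List Int) (tmp : List Char), tmp ≠ [] →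
    find_arguments_loop r args "second" tmp =
      match r.dropWhile PySem.Chars.isdigit with
      | c1 :: _ => if c1 = ')' then
            some (args ++ [(PySem.Int.ofChars? (tmp ++ r.takeWhile PySem.Chars.isdigit)).getD 0])
          else none
      | [] => none := by
  induction r with
  | nil => intro args tmp h; simp [find_arguments_loop]
  | cons c rest ih =>
    intro args tmp h
    by_cases hd : PySem.Chars.isdigit c = true
    · rw [show find_arguments_loop (c :: rest) args "second" tmp
            = find_arguments_loop rest args "second" (tmp ++ [c]) from by
          simp [find_arguments_loop, hd]]
      rw [ih args (tmp ++ [c]) (by simp)]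
      simp only [List.dropWhile_cons, List.takeWhile_cons, hd, if_true]
      cases rest.dropWhile PySem.Chars.isdigit with
      | nil => rfl
      | cons c1 t => simp
    · by_cases hc : c = ','
      · subst hc
        simp [find_arguments_loop, hd, List.dropWhile_cons,
          show PySem.Chars.isdigit ',' = false from by decide,
          show ("second" : String) ≠ "first" from by decide]
      · by_cases hp : c = ')'
        · subst hp
          simp [find_arguments_loop, hd, h, List.dropWhile_cons, List.takeWhile_cons,
            show PySem.Chars.isdigit ')' = false from by decide]
        · simp [find_arguments_loop, hd, hc, hp, List.dropWhile_cons]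

-- phase 2 of A's state machine, no digit seen yet
lemma P2a (r : List Char) : ∀ (args : List Int),
    find_arguments_loop r args "second" [] =
      (if (r.dropWhile (· = ')')).takeWhile PySem.Chars.isdigit = [] then none
       else
        match (r.dropWhile (· = ')')).dropWhile PySem.Chars.isdigit with
        | c1 :: _ => if c1 = ')' then
              some (args ++ [(PySem.Int.ofChars? ((r.dropWhile (· = ')')).takeWhile PySem.Chars.isdigit)).getD 0])
            else none
        | [] => none) := by
  induction r with
  | nil => intro args; simp [find_arguments_loop]
  | cons c rest ih =>
    intro args
    by_cases hp : c = ')'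
    · subst hp
      rw [show find_arguments_loop (')' :: rest) args "second" []
            = find_arguments_loop rest args "second" [] from by
          simp [find_arguments_loop, show PySem.Chars.isdigit ')' = false from by decide]]
      rw [ih args]
      simp [List.dropWhile_cons]
    · by_cases hd : PySem.Chars.isdigit c = true
      · rw [show find_arguments_loop (c :: rest) args "second" []
              = find_arguments_loop rest args "second" [c] from by
            simp [find_arguments_loop, hd]]
        rw [P2b rest args [c] (by simp)]
        rw [show List.dropWhile (fun x => decide (x = ')')) (c :: rest) = c :: rest from by
          simp [hp]]
        cases hdw : rest.dropWhile PySem.Chars.isdigit with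
        | nil => simp [hd, hdw]
        | cons c1 t => by_cases h1 : c1 = ')' <;> simp [hd, hdw, h1]
      · have h1 : find_arguments_loop (c :: rest) args "second" [] = none := by
          by_cases hc : c = ','
          · subst hc
            simp [find_arguments_loop,
              show PySem.Chars.isdigit ',' = false from by decide,
              show ("second" : String) ≠ "first" from by decide]
          · simp [find_arguments_loop, hd, hc, hp]
        rw [h1]
        simp [List.dropWhile_cons, List.takeWhile_cons, hp, hd]

-- phase 1 of A's state machine = scanArg1
lemma P1 (cs : List Char) : ∀ tmp : List Char,
    find_arguments_loop cs [] "first" tmp =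
      match (scanArg1 cs tmp).2 with
      | [] => none
      | c0 :: r2 =>
        if c0 = ',' then
          if (scanArg1 cs tmp).1 = [] then none
          else find_arguments_loop r2 [(PySem.Int.ofChars? (scanArg1 cs tmp).1).getD 0] "second" []
        else none := by
  induction cs with
  | nil => intro tmp; simp [find_arguments_loop, scanArg1]
  | cons c rest ih =>
    intro tmp
    by_cases hd : PySem.Chars.isdigit c = true
    · rw [show find_arguments_loop (c :: rest) [] "first" tmp
            = find_arguments_loop rest [] "first" (tmp ++ [c]) from by
          simp [find_arguments_loop, hd]]
      rw [show scanArg1 (c :: rest) tmp = scanArg1 rest (tmp ++ [c]) from by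
          simp [scanArg1, hd]]
      exact ih (tmp ++ [c])
    · by_cases hc : c = ','
      · subst hc
        rw [show scanArg1 (',' :: rest) tmp = (tmp, ',' :: rest) from by
            simp [scanArg1, show PySem.Chars.isdigit ',' = false from by decide]]
        by_cases ht : tmp = []
        · simp [find_arguments_loop, ht,
            show PySem.Chars.isdigit ',' = false from by decide]
        · simp [find_arguments_loop, ht,
            show PySem.Chars.isdigit ',' = false from by decide]
      · by_cases hp : c = ')'
        · subst hp
          rw [show find_arguments_loop (')' :: rest) [] "first" tmp
                = find_arguments_loop rest [] "first" tmp from by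
              simp [find_arguments_loop,
                show PySem.Chars.isdigit ')' = false from by decide,
                show ("first" : String) ≠ "second" from by decide]]
          rw [show scanArg1 (')' :: rest) tmp = scanArg1 rest tmp from by
              simp [scanArg1, show PySem.Chars.isdigit ')' = false from by decide]]
          exact ih tmp
        · rw [show scanArg1 (c :: rest) tmp = (tmp, c :: rest) from by
              simp [scanArg1, hd, hp]]
          simp [find_arguments_loop, hd, hc, hp]

-- A's find_arguments = matchMul (value part), at any position with the 'mul(' prefix
lemma FA_eq (suf : List Char) (h4 : suf.take 4 = "mul(".toList) :
    find_arguments suf = (matchMul suf).map Prod.fst := by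
  simp only [find_arguments, matchMul, h4, if_true, ite_true, reduceIte]
  rw [show PySem.List.slice suf (some 4) none = suf.drop 4 from by
    rw [PySem.List.slice_from suf (by norm_num : (0:Int) ≤ (4:Int)), show Int.toNat 4 = 4 from rfl]]
  rw [P1 (suf.drop 4) []]
  rcases hs : scanArg1 (suf.drop 4) [] with ⟨d1, r1⟩
  cases r1 with
  | nil => simp
  | cons c0 r2 =>
    by_cases hc0 : c0 = ','
    · subst hc0
      by_cases hd1 : d1 = []
      · simp [hd1]
      · simp only [hd1, if_false, ite_false, if_true, ite_true, reduceIte]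
        rw [P2a r2 [(PySem.Int.ofChars? d1).getD 0]]
        by_cases htw : (r2.dropWhile (· = ')')).takeWhile PySem.Chars.isdigit = []
        · simp [htw]
        · simp only [htw, if_false, ite_false, reduceIte]
          cases hdw : (r2.dropWhile (· = ')')).dropWhile PySem.Chars.isdigit with
          | nil => simp [hdw]
          | cons c1 t => by_cases h1 : c1 = ')' <;> simp [hdw, h1]
    · simp [hc0]

lemma step_inert {cs : List Char} {i : Int}
    (h : ∀ c, PySem.List.pyGet? cs i = some c → c ≠ 'd' ∧ c ≠ 'm') (st : List (List Int) × Bool) :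
    find_muls_step cs st i = st := by
  unfold find_muls_step
  rcases hg : PySem.List.pyGet? cs i with _ | c
  · rfl
  · obtain ⟨h1, h2⟩ := h c hg
    simp [h1, h2]

lemma foldl_inert (cs : List Char) : ∀ (n : Nat) (a : Int) (st : List (List Int) × Bool),
    (∀ j : Int, a ≤ j → j < a + n → ∀ c, PySem.List.pyGet? cs j = some c → c ≠ 'd' ∧ c ≠ 'm') →
    (PySem.List.pyRange a (a + n) 1).foldl (find_muls_step cs) st = st := by
  intro n
  induction n with
  | zero =>
    intro a st _
    rw [PySem.List.pyRange_one_eq_nil (by push_cast; omega)]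
    rfl
  | succ n ih =>
    intro a st h
    rw [PySem.List.pyRange_one_cons (by push_cast; omega : a < a + ((n + 1 : Nat) : Int))]
    rw [List.foldl_cons]
    rw [step_inert (fun c hc => h a le_rfl (by push_cast; omega) c hc) st]
    have hrec := ih (a + 1) st
      (fun j hj1 hj2 c hc => h j (by omega) (by push_cast at hj2 ⊢; omega) c hc)
    rw [show a + ((n + 1 : Nat) : Int) = (a + 1) + (n : Nat) from by push_cast; omega]
    exact hrec

-- a take-prefix fact gives each character of the matched region
lemma getElem?_of_take_eq {cs pat : List Char} {k t : Nat}
    (h : (cs.drop k).take pat.length = pat) (ht : t < pat.length) :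
    cs[k + t]? = some pat[t] := by
  have hlen : pat.length ≤ (cs.drop k).length := by
    have h2 := congrArg List.length h
    rw [List.length_take] at h2
    omega
  have hk : k + t < cs.length := by
    rw [List.length_drop] at hlen
    omega
  rw [← List.getElem?_drop]
  rw [← List.getElem?_eq_getElem ht]
  rw [← h, List.getElem?_take]
  simp [ht]

lemma startswith_eq_take (s p : List Char) :
    PySem.Chars.startswith s p = true ↔ s.take p.length = p := by
  rw [PySem.Chars.startswith_iff, List.prefix_iff_eq_take]
  exact ⟨fun h => h.symm, fun h => h.symm⟩

lemma inert_of_pat {cs pat : List Char} {k : Nat}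
    (hp : (cs.drop k).take pat.length = pat)
    (hpat : ∀ t : Nat, (ht : t < pat.length) → 1 ≤ t → pat[t] ≠ 'd' ∧ pat[t] ≠ 'm') :
    ∀ t : Nat, 1 ≤ t → t < pat.length → ∀ c, cs[k + t]? = some c → c ≠ 'd' ∧ c ≠ 'm' := by
  intro t ht1 ht2 c hc
  rw [getElem?_of_take_eq hp ht2] at hc
  obtain rfl := Option.some.inj hc
  exact hpat t ht2 ht1

-- peel a matched region of length L0 off A's fold: one active step at k, inert interior
lemma split_fold (cs : List Char) (k L0 : Nat) (st st' : List (List Int) × Bool)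
    (hL : k + L0 ≤ cs.length) (h0 : 1 ≤ L0)
    (hstep : find_muls_step cs st (k : Int) = st')
    (hinert : ∀ t : Nat, 1 ≤ t → t < L0 → ∀ c, cs[k + t]? = some c → c ≠ 'd' ∧ c ≠ 'm') :
    (PySem.List.pyRange (k : Int) (cs.length : Int) 1).foldl (find_muls_step cs) st
      = (PySem.List.pyRange ((k + L0 : Nat) : Int) (cs.length : Int) 1).foldl (find_muls_step cs) st' := by
  rw [PySem.List.pyRange_one_append (k : Int) ((k + L0 : Nat) : Int) (cs.length : Int)
    (by push_cast; omega) (by push_cast; omega)]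
  rw [List.foldl_append]
  congr 1
  rw [PySem.List.pyRange_one_cons (by push_cast; omega : (k : Int) < ((k + L0 : Nat) : Int))]
  rw [List.foldl_cons, hstep]
  have hrw : ((k + L0 : Nat) : Int) = ((k : Int) + 1) + ((L0 - 1 : Nat) : Int) := by
    push_cast; omega
  rw [hrw]
  apply foldl_inert
  intro j hj1 hj2 c hc
  have ht : ∃ t : Nat, j = ((k + t : Nat) : Int) ∧ 1 ≤ t ∧ t < L0 := by
    refine ⟨(j - k).toNat, by push_cast; omega, by push_cast at hj1; omega,
      by push_cast at hj2; omega⟩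
  obtain ⟨t, rfl, ht1, ht2⟩ := ht
  rw [PySem.List.pyGet?_natCast] at hc
  exact hinert t ht1 ht2 c hc

-- the main simulation: A's fold over the remaining indices = scanL of the remaining text
lemma main_sim (cs : List Char) : ∀ (N k : Nat) (st : List (List Int) × Bool), cs.length ≤ k + N →
    (PySem.List.pyRange (k : Int) (cs.length : Int) 1).foldl (find_muls_step cs) st =
      scanL (cs.drop k) st.1 st.2 := by
  intro N
  induction N with
  | zero =>
    intro k st h
    rw [List.drop_eq_nil_of_le (by omega), PySem.List.pyRange_one_eq_nil (by push_cast; omega)]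
    simp [scanL]
  | succ N ih =>
    intro k st h
    by_cases hk : cs.length ≤ k
    · rw [List.drop_eq_nil_of_le hk, PySem.List.pyRange_one_eq_nil (by push_cast; omega)]
      simp [scanL]
    push_neg at hk
    have hdropk : cs.drop k = cs[k] :: cs.drop (k + 1) := List.drop_eq_getElem_cons hk
    by_cases h1 : (cs.drop k).take 4 = "do()".toList
    · -- ---- do() matched ----
      have h1' : (cs.drop k).take ("do()".toList.length) = "do()".toList := by
        rw [show ("do()".toList).length = 4 from by decide]; exact h1
      have h4k : k + 4 ≤ cs.length := by
        have h2 := congrArg List.length h1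
        rw [List.length_take, List.length_drop] at h2
        simp at h2; omega
      have hc0 : cs[k]? = some 'd' := by
        have hg := getElem?_of_take_eq h1' (show (0:Nat) < "do()".toList.length from by decide)
        rw [show ("do()".toList)[0]'(by decide) = 'd' from by decide] at hg
        simpa using hg
      have hstep : find_muls_step cs st (k : Int) = (st.1, true) := by
        unfold find_muls_step
        rw [PySem.List.pyGet?_natCast, hc0]
        rw [PySem.List.slice_from_natCast]
        have hsw : PySem.Chars.startswith (cs.drop k) ['d','o','(',')'] = true := by
          rw [show (['d','o','(',')'] : List Char) = "do()".toList from by decide]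
          exact (startswith_eq_take (cs.drop k) "do()".toList).2 h1'
        simp [hsw]
      have hlen4 : (4 : Nat) ≤ ("do()".toList).length := by decide
      rw [split_fold cs k 4 st (st.1, true) h4k (by omega) hstep
        (fun t ht1 ht2 c hc =>
          inert_of_pat h1' (by decide) t ht1 (lt_of_lt_of_le ht2 hlen4) c hc)]
      rw [ih (k + 4) (st.1, true) (by omega)]
      have hB : scanL (cs.drop k) st.1 st.2 = scanL ((cs.drop (k + 1)).drop 3) st.1 true := by
        rw [hdropk, scanL, if_pos (by rw [← hdropk]; exact h1)]
      have hdd : (cs.drop (k + 1)).drop 3 = cs.drop (k + 4) := by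
        rw [List.drop_drop]
      rw [hB, hdd]
    · by_cases h2 : (cs.drop k).take 7 = "don't()".toList
      · -- ---- don't() matched ----
        have h2' : (cs.drop k).take ("don't()".toList.length) = "don't()".toList := by
          rw [show ("don't()".toList).length = 7 from by decide]; exact h2
        have h7k : k + 7 ≤ cs.length := by
          have h3 := congrArg List.length h2
          rw [List.length_take, List.length_drop] at h3
          simp at h3; omega
        have hc0 : cs[k]? = some 'd' := by
          have hg := getElem?_of_take_eq h2' (show (0:Nat) < "don't()".toList.length from by decide)
          rw [show ("don't()".toList)[0]'(by decide) = 'd' from by decide] at hg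
          simpa using hg
        have hnegdo : ¬ (PySem.Chars.startswith (cs.drop k) "do()".toList = true) := by
          intro hsw
          exact h1 (by
            have := (startswith_eq_take _ _).1 hsw
            rwa [show ("do()".toList).length = 4 from by decide] at this)
        have hstep : find_muls_step cs st (k : Int) = (st.1, false) := by
          unfold find_muls_step
          rw [PySem.List.pyGet?_natCast, hc0]
          rw [PySem.List.slice_from_natCast]
          have hswd : PySem.Chars.startswith (cs.drop k) ['d','o','(',')'] = false := by
            rw [show (['d','o','(',')'] : List Char) = "do()".toList from by decide]
            exact eq_false_of_ne_true hnegdo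
          have hsw : PySem.Chars.startswith (cs.drop k) ['d','o','n','\'','t','(',')'] = true := by
            rw [show (['d','o','n','\'','t','(',')'] : List Char) = "don't()".toList from by decide]
            exact (startswith_eq_take (cs.drop k) "don't()".toList).2 h2'
          simp [hswd, hsw]
        have hlen7 : (7 : Nat) ≤ ("don't()".toList).length := by decide
        rw [split_fold cs k 7 st (st.1, false) h7k (by omega) hstep
          (fun t ht1 ht2 c hc =>
            inert_of_pat h2' (by decide) t ht1 (lt_of_lt_of_le ht2 hlen7) c hc)]
        rw [ih (k + 7) (st.1, false) (by omega)]
        have hB : scanL (cs.drop k) st.1 st.2 = scanL ((cs.drop (k + 1)).drop 6) st.1 false := by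
          rw [hdropk, scanL, if_neg (by rw [← hdropk]; exact h1),
            if_pos (by rw [← hdropk]; exact h2)]
        have hdd : (cs.drop (k + 1)).drop 6 = cs.drop (k + 7) := by
          rw [List.drop_drop]
        rw [hB, hdd]
      · rcases hm : matchMul (cs.drop k) with _ | ⟨args, rest⟩
        · -- ---- nothing matches at k: A's step is inert, scanL advances one char ----
          have hnegdo : ¬ (PySem.Chars.startswith (cs.drop k) "do()".toList = true) := by
            intro hsw
            exact h1 (by
              have := (startswith_eq_take _ _).1 hsw
              rwa [show ("do()".toList).length = 4 from by decide] at this)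
          have hnegdont : ¬ (PySem.Chars.startswith (cs.drop k) "don't()".toList = true) := by
            intro hsw
            exact h2 (by
              have := (startswith_eq_take _ _).1 hsw
              rwa [show ("don't()".toList).length = 7 from by decide] at this)
          have hstep : find_muls_step cs st (k : Int) = st := by
            unfold find_muls_step
            rw [PySem.List.pyGet?_natCast,
              List.getElem?_eq_getElem hk, PySem.List.slice_from_natCast]
            by_cases hcd : cs[k] = 'd'
            · have hswd : PySem.Chars.startswith (cs.drop k) ['d','o','(',')'] = false := by
                rw [show (['d','o','(',')'] : List Char) = "do()".toList from by decide]
                exact eq_false_of_ne_true hnegdo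
              have hswdt : PySem.Chars.startswith (cs.drop k) ['d','o','n','\'','t','(',')'] = false := by
                rw [show (['d','o','n','\'','t','(',')'] : List Char) = "don't()".toList from by decide]
                exact eq_false_of_ne_true hnegdont
              simp [hcd, hswd, hswdt]
            · by_cases hsw : PySem.Chars.startswith (cs.drop k) "mul(".toList = true
              · have h4m : (cs.drop k).take 4 = "mul(".toList := by
                  have := (startswith_eq_take _ _).1 hsw
                  rwa [show ("mul(".toList).length = 4 from by decide] at this
                have hsw' : PySem.Chars.startswith (cs.drop k) ['m','u','l','('] = true := by
                  rw [show (['m','u','l','('] : List Char) = "mul(".toList from by decide]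
                  exact hsw
                have hfa : find_arguments (cs.drop k) = none := by
                  rw [FA_eq (cs.drop k) h4m, hm]; rfl
                cases hst : st.2 <;> simp [hcd, hsw', hst, hfa]
              · have hsw' : PySem.Chars.startswith (cs.drop k) ['m','u','l','('] = false := by
                  rw [show (['m','u','l','('] : List Char) = "mul(".toList from by decide]
                  exact eq_false_of_ne_true hsw
                simp [hcd, hsw']
          rw [split_fold cs k 1 st st (by omega) (by omega) hstep
            (by intro t ht1 ht2 c hc; omega)]
          rw [ih (k + 1) st (by omega)]
          have hm' : matchMul (cs[k] :: cs.drop (k + 1)) = none := by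
            rw [← hdropk]; exact hm
          conv_rhs => rw [hdropk, scanL]
          rw [if_neg (show ¬ ((cs[k] :: cs.drop (k + 1)).take 4 = "do()".toList) from by
              rw [← hdropk]; exact h1),
            if_neg (show ¬ ((cs[k] :: cs.drop (k + 1)).take 7 = "don't()".toList) from by
              rw [← hdropk]; exact h2)]
          split
          · rename_i args' rest' heq
            rw [← hdropk, hm] at heq
            simp at heq
          · rfl
        · -- ---- a mul match at k ----
          obtain ⟨h4m, pre, hpre, hplen, hpmem⟩ := matchMul_spec hm
          have hL : k + pre.length ≤ cs.length := by
            have h3 := congrArg List.length hpre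
            rw [List.length_drop, List.length_append] at h3
            omega
          have hrest : cs.drop (k + pre.length) = rest := by
            rw [← List.drop_drop, hpre, List.drop_left]
          have hc0 : cs[k]? = some 'm' := by
            have hg := getElem?_of_take_eq
              (pat := "mul(".toList) (by rw [show ("mul(".toList).length = 4 from by decide]; exact h4m)
              (show (0:Nat) < "mul(".toList.length from by decide)
            rw [show ("mul(".toList)[0]'(by decide) = 'm' from by decide] at hg
            simpa using hg
          have hstep : find_muls_step cs st (k : Int)
              = (if st.2 then st.1 ++ [args] else st.1, st.2) := by
            unfold find_muls_step
            rw [PySem.List.pyGet?_natCast, hc0]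
            rw [PySem.List.slice_from_natCast]
            have hsw : PySem.Chars.startswith (cs.drop k) ['m','u','l','('] = true := by
              rw [show (['m','u','l','('] : List Char) = "mul(".toList from by decide]
              apply (startswith_eq_take _ _).2
              rw [show ("mul(".toList).length = 4 from by decide]; exact h4m
            have hfa : find_arguments (cs.drop k) = some args := by
              rw [FA_eq (cs.drop k) h4m, hm]; rfl
            cases hst : st.2
            · simp [hst]
              rw [← hst]
            · simp [hsw, hst, hfa]
          have hinert : ∀ t : Nat, 1 ≤ t → t < pre.length →
              ∀ c, cs[k + t]? = some c → c ≠ 'd' ∧ c ≠ 'm' := by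
            intro t ht1 ht2 c hc
            rw [← List.getElem?_drop, hpre, List.getElem?_append_left ht2,
              List.getElem?_eq_getElem ht2] at hc
            obtain rfl := Option.some.inj hc
            have hmem2 : pre[t] ∈ pre.drop 1 := by
              have hg : (pre.drop 1)[t - 1]'(by rw [List.length_drop]; omega) = pre[t] := by
                rw [List.getElem_drop]
                congr 1
                omega
              rw [← hg]
              exact List.getElem_mem _
            obtain ⟨hm', hd'⟩ := hpmem _ hmem2
            exact ⟨hd', hm'⟩
          rw [split_fold cs k pre.length st (if st.2 then st.1 ++ [args] else st.1, st.2)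
            hL (by omega) hstep hinert]
          rw [ih (k + pre.length) _ (by omega)]
          have hm' : matchMul (cs[k] :: cs.drop (k + 1)) = some (args, rest) := by
            rw [← hdropk]; exact hm
          conv_rhs => rw [hdropk, scanL]
          rw [if_neg (show ¬ ((cs[k] :: cs.drop (k + 1)).take 4 = "do()".toList) from by
              rw [← hdropk]; exact h1),
            if_neg (show ¬ ((cs[k] :: cs.drop (k + 1)).take 7 = "don't()".toList) from by
              rw [← hdropk]; exact h2)]
          rw [hrest]
          split <;> split
          all_goals
            first
              | (rename_i args' rest' heq
                 rw [← hdropk, hm] at heq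
                 have h5 := Option.some.inj heq
                 obtain rfl : args = args' := congrArg Prod.fst h5
                 obtain rfl : rest = rest' := congrArg Prod.snd h5
                 rfl)
              | (rename_i heq
                 rw [← hdropk, hm] at heq
                 exact absurd heq (by simp))

-- ---- lemmas relating the lenient and strict matchers and the D_ shape predicates ----

lemma takeWhile_app {p : Char → Bool} (l1 l2 : List Char) (h : ∀ a ∈ l1, p a = true) :
    (l1 ++ l2).takeWhile p = l1 ++ l2.takeWhile p := by
  induction l1 with
  | nil => simp
  | cons c t ih =>
    rw [List.cons_append, List.takeWhile_cons, if_pos (h c (by simp))]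
    rw [ih (fun a ha => h a (by simp [ha]))]
    rfl

lemma dropWhile_app {p : Char → Bool} (l1 l2 : List Char) (h : ∀ a ∈ l1, p a = true) :
    (l1 ++ l2).dropWhile p = l2.dropWhile p := by
  induction l1 with
  | nil => simp
  | cons c t ih =>
    rw [List.cons_append, List.dropWhile_cons, if_pos (h c (by simp))]
    exact ih (fun a ha => h a (by simp [ha]))

-- scanArg1 in closed form: collected digits / stopping point
lemma scanArg1_eq (cs : List Char) : ∀ acc,
    scanArg1 cs acc = (acc ++ (cs.takeWhile pvPD).filter PySem.Chars.isdigit, cs.dropWhile pvPD) := by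
  induction cs with
  | nil => intro acc; simp [scanArg1]
  | cons c rest ih =>
    intro acc
    by_cases hd : PySem.Chars.isdigit c = true
    · have hpd : pvPD c = true := by simp [pvPD, hd]
      rw [show scanArg1 (c :: rest) acc = scanArg1 rest (acc ++ [c]) from by
          simp [scanArg1, hd]]
      rw [ih (acc ++ [c])]
      simp [List.takeWhile_cons, List.dropWhile_cons, hpd, List.filter_cons, hd]
    · by_cases hp : c = ')'
      · subst hp
        have hpd : pvPD ')' = true := by simp [pvPD]
        rw [show scanArg1 (')' :: rest) acc = scanArg1 rest acc from by
            simp [scanArg1, show PySem.Chars.isdigit ')' = false from by decide]]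
        rw [ih acc]
        simp [List.takeWhile_cons, List.dropWhile_cons, hpd, List.filter_cons,
          show PySem.Chars.isdigit ')' = false from by decide]
      · have hpd : pvPD c = false := by simp [pvPD, hd, hp]
        rw [show scanArg1 (c :: rest) acc = (acc, c :: rest) from by
            simp [scanArg1, hd, hp]]
        simp [List.takeWhile_cons, List.dropWhile_cons, hpd]

-- a lenient-only match site (A accepts, the strict pattern does not) satisfies quirkAt
lemma quirkAt_of {cs : List Char} {v : List Int × List Char}
    (h : matchMul cs = some v) (hs : matchMulS cs = none) : quirkAt cs = true := by
  by_cases h4 : cs.take 4 = "mul(".toList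
  swap
  · unfold matchMul at h; rw [if_neg h4] at h; exact absurd h (by simp)
  unfold matchMul at h
  rw [if_pos h4] at h
  rw [scanArg1_eq (cs.drop 4) []] at h
  simp only [List.nil_append] at h
  rcases hw : (cs.drop 4).dropWhile pvPD with _ | ⟨c0, r2⟩ <;> rw [hw] at h
  · exact absurd h (by simp)
  by_cases hc0 : c0 = ','
  swap
  · simp [hc0] at h
  subst hc0
  simp only [if_true, ite_true, reduceIte] at h
  by_cases hd1 : ((cs.drop 4).takeWhile pvPD).filter PySem.Chars.isdigit = []
  · rw [if_pos hd1] at h; exact absurd h (by simp)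
  rw [if_neg hd1] at h
  by_cases htw : (r2.dropWhile (· = ')')).takeWhile PySem.Chars.isdigit = []
  · rw [if_pos htw] at h; exact absurd h (by simp)
  rw [if_neg htw] at h
  rcases hdw : (r2.dropWhile (· = ')')).dropWhile PySem.Chars.isdigit with _ | ⟨c1, rest⟩ <;>
    rw [hdw] at h
  · exact absurd h (by simp)
  by_cases hc1 : c1 = ')'
  swap
  · simp [hc1] at h
  subst hc1
  have hany : ((cs.drop 4).takeWhile pvPD).any PySem.Chars.isdigit = true := by
    obtain ⟨x, hx⟩ := List.exists_mem_of_ne_nil _ hd1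
    rw [List.mem_filter] at hx
    exact List.any_eq_true.2 ⟨x, hx.1, hx.2⟩
  -- decompose r2 = ')'* ++ digits ++ ')' :: rest and compute its pvPD-run
  have hqmem : ∀ a ∈ r2.takeWhile (· = ')'), a = ')' := fun a ha => by
    simpa using List.mem_takeWhile_imp ha
  have hsplitr2 : r2.takeWhile (· = ')') ++ r2.dropWhile (· = ')') = r2 :=
    List.takeWhile_append_dropWhile
  have hsplitu : (r2.dropWhile (· = ')')).takeWhile PySem.Chars.isdigit ++ (')' :: rest)
      = r2.dropWhile (· = ')') := by
    rw [← hdw]; exact List.takeWhile_append_dropWhile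
  have hwq : r2.takeWhile pvPD
      = r2.takeWhile (· = ')') ++ ((r2.dropWhile (· = ')')).takeWhile pvPD) := by
    conv_lhs => rw [← hsplitr2]
    rw [takeWhile_app _ _ (fun a ha => by rw [hqmem a ha]; rfl)]
  have hwu : (r2.dropWhile (· = ')')).takeWhile pvPD
      = (r2.dropWhile (· = ')')).takeWhile PySem.Chars.isdigit ++ (')' :: rest).takeWhile pvPD := by
    conv_lhs => rw [← hsplitu]
    rw [takeWhile_app _ _ (fun a ha => by simp [pvPD, List.mem_takeWhile_imp ha])]
  have hwp : (')' :: rest).takeWhile pvPD = ')' :: rest.takeWhile pvPD := by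
    simp [List.takeWhile_cons, pvPD]
  have hC : ((r2.takeWhile pvPD).dropWhile (!PySem.Chars.isdigit ·)).contains ')' = true := by
    rw [hwq, hwu, hwp]
    rw [dropWhile_app _ _ (fun a ha => by rw [hqmem a ha]; rfl)]
    rcases hd2c : (r2.dropWhile (· = ')')).takeWhile PySem.Chars.isdigit with _ | ⟨b, d3⟩
    · exact absurd hd2c htw
    · have hb : PySem.Chars.isdigit b = true :=
        List.mem_takeWhile_imp (hd2c ▸ List.mem_cons_self)
      rw [List.cons_append, List.dropWhile_cons, if_neg (by simp [hb])]
      simp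
  have hstray : ((cs.drop 4).takeWhile pvPD).contains ')' = true
      ∨ (r2.takeWhile pvPD).head? = some ')' := by
    rcases hq : r2.takeWhile (· = ')') with _ | ⟨p0, q1⟩
    · by_cases hcon : ((cs.drop 4).takeWhile pvPD).contains ')' = true
      · exact Or.inl hcon
      exfalso
      have hnotin : ')' ∉ (cs.drop 4).takeWhile pvPD := by
        intro hmem
        exact hcon (by simpa using hmem)
      have hdigs : ∀ a ∈ (cs.drop 4).takeWhile pvPD, PySem.Chars.isdigit a = true := by
        intro a ha
        have hpa : pvPD a = true := List.mem_takeWhile_imp ha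
        have hne : ¬ (a = ')') := fun he => hnotin (he ▸ ha)
        simp only [pvPD, Bool.or_eq_true, beq_iff_eq] at hpa
        tauto
      have ha1 : (cs.drop 4).takeWhile pvPD ≠ [] := by
        intro he
        rw [he] at hd1
        exact hd1 rfl
      have hsplit : (cs.drop 4).takeWhile pvPD ++ (',' :: r2) = cs.drop 4 := by
        rw [← hw]; exact List.takeWhile_append_dropWhile
      have ht1 : (cs.drop 4).takeWhile PySem.Chars.isdigit = (cs.drop 4).takeWhile pvPD := by
        conv_lhs => rw [← hsplit]
        rw [takeWhile_app _ _ hdigs]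
        simp [List.takeWhile_cons, show PySem.Chars.isdigit ',' = false from by decide]
      have ht2 : (cs.drop 4).dropWhile PySem.Chars.isdigit = ',' :: r2 := by
        conv_lhs => rw [← hsplit]
        rw [dropWhile_app _ _ hdigs]
        simp [List.dropWhile_cons, show PySem.Chars.isdigit ',' = false from by decide]
      rcases hr2 : r2 with _ | ⟨b, r3⟩
      · rw [hr2] at htw
        simp at htw
      have hb : ¬ (b = ')') := by
        intro he
        rw [hr2, he, List.takeWhile_cons] at hq
        simp at hq
      have hu : r2.dropWhile (· = ')') = r2 := by
        rw [hr2, List.dropWhile_cons, if_neg (by simpa using hb)]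
      rw [hu] at htw hdw
      have hsome : (matchMulS cs).isSome = true := by
        unfold matchMulS
        simp [h4, ht1, ht2, ha1, htw, hdw]
      rw [hs] at hsome
      simp at hsome
    · refine Or.inr ?_
      have hp0 : p0 = ')' := hqmem p0 (hq ▸ List.mem_cons_self)
      rw [hwq, hq, hp0]
      rfl
  unfold quirkAt
  rw [List.span_eq_takeWhile_dropWhile]
  have hC' : ')' ∈ (r2.takeWhile pvPD).dropWhile (!PySem.Chars.isdigit ·) := by simpa using hC
  rcases hstray with hd | hd
  · have hd' : ')' ∈ (cs.drop 4).takeWhile pvPD := by simpa using hd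
    simp [h4, hw, hany, hC', hd']
  · simp [h4, hw, hany, hC', hd]

-- a strict match is also a lenient match with the same value
lemma matchMul_of_matchMulS {cs : List Char} {v : List Int × List Char}
    (h : matchMulS cs = some v) : matchMul cs = some v := by
  by_cases h4 : cs.take 4 = "mul(".toList
  swap
  · unfold matchMulS at h; rw [if_neg h4] at h; exact absurd h (by simp)
  unfold matchMulS at h
  rw [if_pos h4] at h
  simp only at h
  by_cases hd1 : (cs.drop 4).takeWhile PySem.Chars.isdigit = []
  · rw [if_pos hd1] at h; exact absurd h (by simp)
  rw [if_neg hd1] at h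
  rcases hw : (cs.drop 4).dropWhile PySem.Chars.isdigit with _ | ⟨c0, r2⟩ <;> rw [hw] at h
  · exact absurd h (by simp)
  by_cases hc0 : c0 = ','
  swap
  · simp [hc0] at h
  subst hc0
  simp only [if_true, ite_true, reduceIte] at h
  by_cases hd2 : r2.takeWhile PySem.Chars.isdigit = []
  · rw [if_pos hd2] at h; exact absurd h (by simp)
  rw [if_neg hd2] at h
  rcases hw2 : r2.dropWhile PySem.Chars.isdigit with _ | ⟨c1, rest⟩ <;> rw [hw2] at h
  · exact absurd h (by simp)
  by_cases hc1 : c1 = ')'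
  swap
  · simp [hc1] at h
  subst hc1
  simp only [if_true, ite_true, reduceIte] at h
  have hdigs : ∀ a ∈ (cs.drop 4).takeWhile PySem.Chars.isdigit, PySem.Chars.isdigit a = true :=
    fun a ha => List.mem_takeWhile_imp ha
  have hpd : ∀ a ∈ (cs.drop 4).takeWhile PySem.Chars.isdigit, pvPD a = true :=
    fun a ha => by simp [pvPD, hdigs a ha]
  have hsplit : (cs.drop 4).takeWhile PySem.Chars.isdigit ++ (',' :: r2) = cs.drop 4 := by
    rw [← hw]; exact List.takeWhile_append_dropWhile
  have ht1 : (cs.drop 4).takeWhile pvPD = (cs.drop 4).takeWhile PySem.Chars.isdigit := by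
    conv_lhs => rw [← hsplit]
    rw [takeWhile_app _ _ hpd]
    simp [List.takeWhile_cons, pvPD, show PySem.Chars.isdigit ',' = false from by decide]
  have ht2 : (cs.drop 4).dropWhile pvPD = ',' :: r2 := by
    conv_lhs => rw [← hsplit]
    rw [dropWhile_app _ _ hpd]
    simp [List.dropWhile_cons, pvPD, show PySem.Chars.isdigit ',' = false from by decide]
  have hfil : ((cs.drop 4).takeWhile PySem.Chars.isdigit).filter PySem.Chars.isdigit
      = (cs.drop 4).takeWhile PySem.Chars.isdigit := List.filter_eq_self.2 hdigs
  have hr2 : r2.dropWhile (· = ')') = r2 := by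
    rcases hr : r2 with _ | ⟨a, r3⟩
    · rfl
    · have ha : PySem.Chars.isdigit a = true := by
        by_contra hna
        rw [Bool.not_eq_true] at hna
        rw [hr, List.takeWhile_cons, hna] at hd2
        simp at hd2
      have hap : ¬ (a = ')') := by
        rintro rfl
        exact absurd ha (by decide)
      rw [List.dropWhile_cons, if_neg (by simpa using hap)]
  unfold matchMul
  rw [if_pos h4, scanArg1_eq (cs.drop 4) []]
  simp only [List.nil_append, ht1, ht2, hfil, hr2]
  simp [hd1, hd2, hw2]
  exact Option.some.inj h

-- ---- enabledAt lemmas ----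

-- the do()/don't() toggle state just before index k (proof-internal)
def enabledAt (cs : List Char) (e0 : Bool) (k : Nat) : Bool :=
  (List.range k).foldl (fun e j =>
    if "do()".toList.isPrefixOf (cs.drop j) then true
    else if "don't()".toList.isPrefixOf (cs.drop j) then false
    else e) e0

lemma pfx_take (p s : List Char) : p.isPrefixOf s = true ↔ s.take p.length = p := by
  rw [List.isPrefixOf_iff_prefix, List.prefix_iff_eq_take]
  constructor <;> intro h <;> exact h.symm

lemma enabledAt_succ (cs : List Char) (e0 : Bool) (k : Nat) :
    enabledAt cs e0 (k + 1) =
      (if "do()".toList.isPrefixOf (cs.drop k) then true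
       else if "don't()".toList.isPrefixOf (cs.drop k) then false
       else enabledAt cs e0 k) := by
  unfold enabledAt
  rw [List.range_succ, List.foldl_append]
  rfl

lemma step_eq {cs : List Char} {j : Nat} (h : cs[j]? ≠ some 'd') (e : Bool) :
    (if "do()".toList.isPrefixOf (cs.drop j) then true
     else if "don't()".toList.isPrefixOf (cs.drop j) then false
     else e) = e := by
  have h1 : ¬ ("do()".toList.isPrefixOf (cs.drop j) = true) := by
    intro hdo
    apply h
    have hg := getElem?_of_take_eq (k := j) (t := 0) (pat := "do()".toList)
      ((pfx_take _ _).1 hdo) (by decide)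
    rw [show ("do()".toList)[0]'(by decide) = 'd' from by decide] at hg
    simpa using hg
  have h2 : ¬ ("don't()".toList.isPrefixOf (cs.drop j) = true) := by
    intro hdont
    apply h
    have hg := getElem?_of_take_eq (k := j) (t := 0) (pat := "don't()".toList)
      ((pfx_take _ _).1 hdont) (by decide)
    rw [show ("don't()".toList)[0]'(by decide) = 'd' from by decide] at hg
    simpa using hg
  rw [if_neg h1, if_neg h2]

lemma enabledAt_skip (cs : List Char) (e0 : Bool) :
    ∀ (L k : Nat), (∀ j, k ≤ j → j < k + L → cs[j]? ≠ some 'd') →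
    enabledAt cs e0 (k + L) = enabledAt cs e0 k := by
  intro L
  induction L with
  | zero => intro k _; rfl
  | succ L ih =>
    intro k h
    rw [show k + (L + 1) = (k + L) + 1 from rfl, enabledAt_succ,
      step_eq (h (k + L) (by omega) (by omega)) _]
    exact ih k (fun j hj1 hj2 => h j hj1 (by omega))

lemma enabledAt_cons (c : Char) (t : List Char) (e0 : Bool) :
    ∀ k, enabledAt (c :: t) e0 (k + 1) =
      enabledAt t
        (if "do()".toList.isPrefixOf (c :: t) then true
         else if "don't()".toList.isPrefixOf (c :: t) then false
         else e0) k := by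
  intro k
  induction k with
  | zero =>
    rw [enabledAt_succ]
    rfl
  | succ k ih =>
    rw [enabledAt_succ, ih, enabledAt_succ]
    rfl

lemma quirkScan_suffix : ∀ (cs : List Char) (e0 : Bool), quirkScan cs e0 = false →
    ∀ k, (enabledAt cs e0 k && quirkAt (cs.drop k)) = false := by
  intro cs
  induction cs with
  | nil =>
    intro e0 _ k
    have : quirkAt ([] : List Char) = false := by decide
    simp [List.drop_nil, this]
  | cons c t ih =>
    intro e0 hq k
    rw [quirkScan] at hq
    have hq0 : (e0 && quirkAt (c :: t)) = false := by
      by_cases hb : (e0 && quirkAt (c :: t)) = true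
      · rw [if_pos hb] at hq; exact absurd hq (by simp)
      · rwa [Bool.not_eq_true] at hb
    have hqrec := hq
    rw [if_neg (by rw [hq0]; simp)] at hqrec
    cases k with
    | zero => exact hq0
    | succ k =>
      rw [List.drop_succ_cons, enabledAt_cons]
      exact ih _ hqrec k

-- ---- scanS walks through a matchless region one character at a time ----

lemma scanS_walk (cs : List Char) :
    ∀ (L k : Nat) (r : List (List Int)) (e : Bool), k + L ≤ cs.length →
    (∀ j, k ≤ j → j < k + L →
      ¬ ((cs.drop j).take 4 = "do()".toList) ∧ ¬ ((cs.drop j).take 7 = "don't()".toList) ∧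
        matchMulS (cs.drop j) = none) →
    scanS (cs.drop k) r e = scanS (cs.drop (k + L)) r e := by
  intro L
  induction L with
  | zero => intro k r e _ _; rfl
  | succ L ih =>
    intro k r e hlen h
    have hk : k < cs.length := by omega
    have hdropk : cs.drop k = cs[k] :: cs.drop (k + 1) := List.drop_eq_getElem_cons hk
    obtain ⟨hdo, hdont, hmm⟩ := h k (le_refl k) (by omega)
    conv_lhs => rw [hdropk, scanS]
    rw [show matchMulS (cs[k] :: cs.drop (k + 1)) = none from by rw [← hdropk]; exact hmm]
    simp only
    rw [if_neg (show ¬ ((cs[k] :: cs.drop (k + 1)).take 4 = "do()".toList) from by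
        rw [← hdropk]; exact hdo),
      if_neg (show ¬ ((cs[k] :: cs.drop (k + 1)).take 7 = "don't()".toList) from by
        rw [← hdropk]; exact hdont)]
    rw [show k + (L + 1) = (k + 1) + L from by omega]
    exact ih (k + 1) r e (by omega) (fun j hj1 hj2 => h j (by omega) (by omega))

lemma matchMulS_take4 {cs : List Char} {v : List Int × List Char}
    (h : matchMulS cs = some v) : cs.take 4 = "mul(".toList := by
  by_cases h4 : cs.take 4 = "mul(".toList
  · exact h4
  · unfold matchMulS at h; rw [if_neg h4] at h; exact absurd h (by simp)

-- the characters of a matched lenient region: 'm' at its start, no 'm'/'d' inside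
lemma region_no_md {cs pre rest : List Char} {k : Nat}
    (hpre : cs.drop k = pre ++ rest) (h4m : (cs.drop k).take 4 = "mul(".toList)
    (hL : k + pre.length ≤ cs.length)
    (hpmem : ∀ c ∈ pre.drop 1, c ≠ 'm' ∧ c ≠ 'd') :
    (∀ j, k ≤ j → j < k + pre.length → cs[j]? ≠ some 'd') ∧
    (∀ j, k < j → j < k + pre.length → cs[j]? ≠ some 'd' ∧ cs[j]? ≠ some 'm') := by
  have hck : cs[k]? = some 'm' := by
    have hg := getElem?_of_take_eq
      (pat := "mul(".toList) (by rw [show ("mul(".toList).length = 4 from by decide]; exact h4m)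
      (show (0:Nat) < "mul(".toList.length from by decide)
    rw [show ("mul(".toList)[0]'(by decide) = 'm' from by decide] at hg
    simpa using hg
  have hin : ∀ j, k < j → j < k + pre.length → cs[j]? ≠ some 'd' ∧ cs[j]? ≠ some 'm' := by
    intro j hj1 hj2
    obtain ⟨t, rfl, ht1, ht2⟩ : ∃ t, j = k + t ∧ 1 ≤ t ∧ t < pre.length :=
      ⟨j - k, by omega, by omega, by omega⟩
    have hget : cs[k + t]? = some pre[t] := by
      rw [← List.getElem?_drop, hpre, List.getElem?_append_left ht2,
        List.getElem?_eq_getElem ht2]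
    have hmem2 : pre[t] ∈ pre.drop 1 := by
      have hg : (pre.drop 1)[t - 1]'(by rw [List.length_drop]; omega) = pre[t] := by
        rw [List.getElem_drop]; congr 1; omega
      rw [← hg]; exact List.getElem_mem _
    obtain ⟨hm', hd'⟩ := hpmem _ hmem2
    rw [hget]
    constructor <;> intro hc <;> [exact hd' (Option.some.inj hc); exact hm' (Option.some.inj hc)]
  refine ⟨?_, hin⟩
  intro j hj1 hj2
  rcases Nat.eq_or_lt_of_le hj1 with rfl | hlt
  · rw [hck]; intro hc; exact absurd (Option.some.inj hc) (by decide)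
  · exact (hin j hlt hj2).1

-- scanS finds nothing inside a lenient-only matched region: it walks through it
lemma scanS_skip (cs : List Char) (k : Nat) {pre rest : List Char}
    (h1 : ¬ ((cs.drop k).take 4 = "do()".toList)) (h2 : ¬ ((cs.drop k).take 7 = "don't()".toList))
    (hms : matchMulS (cs.drop k) = none)
    (hpre : cs.drop k = pre ++ rest) (h4m : (cs.drop k).take 4 = "mul(".toList)
    (hL : k + pre.length ≤ cs.length)
    (hpmem : ∀ c ∈ pre.drop 1, c ≠ 'm' ∧ c ≠ 'd') :
    ∀ (r : List (List Int)) (e : Bool),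
      scanS (cs.drop k) r e = scanS (cs.drop (k + pre.length)) r e := by
  obtain ⟨-, hnomd⟩ := region_no_md hpre h4m hL hpmem
  intro r e
  apply scanS_walk cs pre.length k r e hL
  intro j hj1 hj2
  rcases Nat.eq_or_lt_of_le hj1 with rfl | hlt
  · exact ⟨h1, h2, hms⟩
  · obtain ⟨hjd, hjm⟩ := hnomd j hlt hj2
    refine ⟨?_, ?_, ?_⟩
    · intro hdo
      exact hjd (by
        have hg := getElem?_of_take_eq (k := j) (t := 0)
          (pat := "do()".toList)
          (by rw [show ("do()".toList).length = 4 from by decide]; exact hdo)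
          (by decide)
        rw [show ("do()".toList)[0]'(by decide) = 'd' from by decide] at hg
        simpa using hg)
    · intro hdont
      exact hjd (by
        have hg := getElem?_of_take_eq (k := j) (t := 0)
          (pat := "don't()".toList)
          (by rw [show ("don't()".toList).length = 7 from by decide]; exact hdont)
          (by decide)
        rw [show ("don't()".toList)[0]'(by decide) = 'd' from by decide] at hg
        simpa using hg)
    · rcases hms' : matchMulS (cs.drop j) with _ | v
      · rfl
      · exfalso
        apply hjm
        have h4' := matchMulS_take4 hms'
        have hg := getElem?_of_take_eq (k := j) (t := 0)
          (pat := "mul(".toList)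
          (by rw [show ("mul(".toList).length = 4 from by decide]; exact h4')
          (by decide)
        rw [show ("mul(".toList)[0]'(by decide) = 'm' from by decide] at hg
        simpa using hg

-- ---- the second simulation: scanL = scanS when every lenient-only site is disabled ----

lemma pat_no_d {cs pat : List Char} {k : Nat}
    (hp : (cs.drop k).take pat.length = pat) (hd : 'd' ∉ pat.drop 1) :
    ∀ j, k + 1 ≤ j → j < k + pat.length → cs[j]? ≠ some 'd' := by
  intro j hj1 hj2
  obtain ⟨t, rfl, ht1, ht2⟩ : ∃ t, j = k + t ∧ 1 ≤ t ∧ t < pat.length :=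
    ⟨j - k, by omega, by omega, by omega⟩
  rw [getElem?_of_take_eq hp ht2]
  intro hc
  apply hd
  have hg : (pat.drop 1)[t - 1]'(by rw [List.length_drop]; omega) = pat[t] := by
    rw [List.getElem_drop]; congr 1; omega
  rw [← Option.some.inj hc, ← hg]
  exact List.getElem_mem _

lemma sim2 (cs : List Char) (e0 : Bool)
    (H : ∀ k, k < cs.length → quirkAt (cs.drop k) = true → enabledAt cs e0 k = false) :
    ∀ (N k : Nat) (r : List (List Int)), cs.length ≤ k + N →
    scanL (cs.drop k) r (enabledAt cs e0 k) = scanS (cs.drop k) r (enabledAt cs e0 k) := by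
  intro N
  induction N with
  | zero =>
    intro k r h
    rw [List.drop_eq_nil_of_le (by omega)]
    simp [scanL, scanS]
  | succ N ih =>
    intro k r h
    by_cases hk : cs.length ≤ k
    · rw [List.drop_eq_nil_of_le hk]; simp [scanL, scanS]
    push_neg at hk
    have hdropk : cs.drop k = cs[k] :: cs.drop (k + 1) := List.drop_eq_getElem_cons hk
    by_cases h1 : (cs.drop k).take 4 = "do()".toList
    · -- ---- do() at k: both toggle on and jump 4 ----
      have h1' : (cs.drop k).take ("do()".toList.length) = "do()".toList := by
        rw [show ("do()".toList).length = 4 from by decide]; exact h1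
      have h4k : k + 4 ≤ cs.length := by
        have h2 := congrArg List.length h1
        rw [List.length_take, List.length_drop] at h2
        simp at h2; omega
      have he1 : enabledAt cs e0 (k + 1) = true := by
        rw [enabledAt_succ, if_pos ((pfx_take _ _).2 h1')]
      have he4 : enabledAt cs e0 (k + 4) = true := by
        rw [show k + 4 = (k + 1) + 3 from by omega,
          enabledAt_skip cs e0 3 (k + 1)
            (fun j hj1 hj2 => pat_no_d h1' (by decide) j hj1 (by rw [show ("do()".toList).length = 4 from by decide]; omega)),
          he1]
      have hck : cs[k]? = some 'd' := by
        have hg := getElem?_of_take_eq h1' (show (0:Nat) < "do()".toList.length from by decide)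
        rw [show ("do()".toList)[0]'(by decide) = 'd' from by decide] at hg
        simpa using hg
      have hmm : matchMulS (cs.drop k) = none := by
        rcases hms : matchMulS (cs.drop k) with _ | v
        · rfl
        · exfalso
          have := matchMulS_take4 hms
          rw [h1] at this
          exact absurd this (by decide)
      have hdd : (cs.drop (k + 1)).drop 3 = cs.drop (k + 4) := by rw [List.drop_drop]
      have hLs : scanL (cs.drop k) r (enabledAt cs e0 k) = scanL (cs.drop (k + 4)) r true := by
        conv_lhs => rw [hdropk, scanL]
        rw [if_pos (by rw [← hdropk]; exact h1), hdd]
      have hSs : scanS (cs.drop k) r (enabledAt cs e0 k) = scanS (cs.drop (k + 4)) r true := by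
        conv_lhs => rw [hdropk, scanS]
        rw [show matchMulS (cs[k] :: cs.drop (k + 1)) = none from by rw [← hdropk]; exact hmm]
        simp only
        rw [if_pos (by rw [← hdropk]; exact h1), hdd]
      rw [hLs, hSs, ← he4]
      exact ih (k + 4) r (by omega)
    · by_cases h2 : (cs.drop k).take 7 = "don't()".toList
      · -- ---- don't() at k: both toggle off and jump 7 ----
        have h2' : (cs.drop k).take ("don't()".toList.length) = "don't()".toList := by
          rw [show ("don't()".toList).length = 7 from by decide]; exact h2
        have h7k : k + 7 ≤ cs.length := by
          have h3 := congrArg List.length h2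
          rw [List.length_take, List.length_drop] at h3
          simp at h3; omega
        have hnd1 : ¬ ("do()".toList.isPrefixOf (cs.drop k) = true) := by
          intro hp
          exact h1 (by
            have := (pfx_take _ _).1 hp
            rwa [show ("do()".toList).length = 4 from by decide] at this)
        have he1 : enabledAt cs e0 (k + 1) = false := by
          rw [enabledAt_succ, if_neg hnd1, if_pos ((pfx_take _ _).2 h2')]
        have he7 : enabledAt cs e0 (k + 7) = false := by
          rw [show k + 7 = (k + 1) + 6 from by omega,
            enabledAt_skip cs e0 6 (k + 1)
              (fun j hj1 hj2 => pat_no_d h2' (by decide) j hj1 (by rw [show ("don't()".toList).length = 7 from by decide]; omega)),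
            he1]
        have hmm : matchMulS (cs.drop k) = none := by
          rcases hms : matchMulS (cs.drop k) with _ | v
          · rfl
          · exfalso
            have h4' := matchMulS_take4 hms
            have g1 := getElem?_of_take_eq
              (pat := "mul(".toList)
              (by rw [show ("mul(".toList).length = 4 from by decide]; exact h4')
              (show (0:Nat) < "mul(".toList.length from by decide)
            have g2 := getElem?_of_take_eq h2' (show (0:Nat) < "don't()".toList.length from by decide)
            rw [show ("mul(".toList)[0]'(by decide) = 'm' from by decide] at g1
            rw [show ("don't()".toList)[0]'(by decide) = 'd' from by decide] at g2
            simp at g1 g2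
            rw [g1] at g2
            exact absurd g2 (by decide)
        have hdd : (cs.drop (k + 1)).drop 6 = cs.drop (k + 7) := by rw [List.drop_drop]
        have hLs : scanL (cs.drop k) r (enabledAt cs e0 k) = scanL (cs.drop (k + 7)) r false := by
          conv_lhs => rw [hdropk, scanL]
          rw [if_neg (by rw [← hdropk]; exact h1), if_pos (by rw [← hdropk]; exact h2), hdd]
        have hSs : scanS (cs.drop k) r (enabledAt cs e0 k) = scanS (cs.drop (k + 7)) r false := by
          conv_lhs => rw [hdropk, scanS]
          rw [show matchMulS (cs[k] :: cs.drop (k + 1)) = none from by rw [← hdropk]; exact hmm]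
          simp only
          rw [if_neg (by rw [← hdropk]; exact h1), if_pos (by rw [← hdropk]; exact h2), hdd]
        rw [hLs, hSs, ← he7]
        exact ih (k + 7) r (by omega)
      · -- neither toggle matches at k
        have hnd1 : ¬ ("do()".toList.isPrefixOf (cs.drop k) = true) := by
          intro hp
          exact h1 (by
            have := (pfx_take _ _).1 hp
            rwa [show ("do()".toList).length = 4 from by decide] at this)
        have hnd2 : ¬ ("don't()".toList.isPrefixOf (cs.drop k) = true) := by
          intro hp
          exact h2 (by
            have := (pfx_take _ _).1 hp
            rwa [show ("don't()".toList).length = 7 from by decide] at this)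
        have he1 : enabledAt cs e0 (k + 1) = enabledAt cs e0 k := by
          rw [enabledAt_succ, if_neg hnd1, if_neg hnd2]
        rcases hm : matchMul (cs.drop k) with _ | ⟨args, rest⟩
        · -- ---- no lenient match either: both advance one character ----
          have hmm : matchMulS (cs.drop k) = none := by
            rcases hms : matchMulS (cs.drop k) with _ | v
            · rfl
            · rw [matchMul_of_matchMulS hms] at hm; exact absurd hm (by simp)
          have hLs : scanL (cs.drop k) r (enabledAt cs e0 k)
              = scanL (cs.drop (k + 1)) r (enabledAt cs e0 k) := by
            conv_lhs => rw [hdropk, scanL]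
            rw [if_neg (by rw [← hdropk]; exact h1), if_neg (by rw [← hdropk]; exact h2)]
            split
            · rename_i args' rest' heq
              rw [← hdropk, hm] at heq
              simp at heq
            · rfl
          have hSs : scanS (cs.drop k) r (enabledAt cs e0 k)
              = scanS (cs.drop (k + 1)) r (enabledAt cs e0 k) := by
            conv_lhs => rw [hdropk, scanS]
            rw [show matchMulS (cs[k] :: cs.drop (k + 1)) = none from by rw [← hdropk]; exact hmm]
            simp only
            rw [if_neg (by rw [← hdropk]; exact h1), if_neg (by rw [← hdropk]; exact h2)]
          rw [hLs, hSs, ← he1]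
          exact ih (k + 1) r (by omega)
        · -- a lenient mul match at k
          obtain ⟨h4m, pre, hpre, hplen, hpmem⟩ := matchMul_spec hm
          have hL : k + pre.length ≤ cs.length := by
            have h3 := congrArg List.length hpre
            rw [List.length_drop, List.length_append] at h3
            omega
          have hrest : cs.drop (k + pre.length) = rest := by
            rw [← List.drop_drop, hpre, List.drop_left]
          obtain ⟨hnod, hnomd⟩ := region_no_md hpre h4m hL hpmem
          have heL : enabledAt cs e0 (k + pre.length) = enabledAt cs e0 k :=
            enabledAt_skip cs e0 pre.length k hnod
          rcases hms : matchMulS (cs.drop k) with _ | ⟨args', rest'⟩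
          · -- ---- lenient-only (quirky) site: it must be disabled; scanL jumps, scanS walks ----
            have hen : enabledAt cs e0 k = false :=
              H k hk (quirkAt_of hm hms)
            have hLs : scanL (cs.drop k) r (enabledAt cs e0 k)
                = scanL (cs.drop (k + pre.length)) r false := by
              conv_lhs => rw [hdropk, scanL]
              rw [if_neg (by rw [← hdropk]; exact h1), if_neg (by rw [← hdropk]; exact h2)]
              split
              · rename_i args' rest' heq
                rw [← hdropk, hm] at heq
                have h5 := Option.some.inj heq
                obtain rfl : args = args' := congrArg Prod.fst h5
                obtain rfl : rest = rest' := congrArg Prod.snd h5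
                rw [hen, hrest]
                simp
              · rename_i heq
                rw [← hdropk, hm] at heq
                exact absurd heq (by simp)
            have hSs : scanS (cs.drop k) r (enabledAt cs e0 k)
                = scanS (cs.drop (k + pre.length)) r false := by
              rw [hen]
              exact scanS_skip cs k h1 h2 hms hpre h4m hL hpmem r false
            rw [hLs, hSs, ← show enabledAt cs e0 (k + pre.length) = false from by rw [heL, hen]]
            exact ih (k + pre.length) r (by omega)
          · -- ---- a strict match at k: both jump over it ----
            have hms' : matchMul (cs.drop k) = some (args', rest') := matchMul_of_matchMulS hms
            rw [hm] at hms'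
            have h5 := Option.some.inj hms'
            obtain rfl : args = args' := congrArg Prod.fst h5
            obtain rfl : rest = rest' := congrArg Prod.snd h5
            have hLs : scanL (cs.drop k) r (enabledAt cs e0 k)
                = scanL (cs.drop (k + pre.length))
                    (if enabledAt cs e0 k then r ++ [args] else r) (enabledAt cs e0 k) := by
              conv_lhs => rw [hdropk, scanL]
              rw [if_neg (by rw [← hdropk]; exact h1), if_neg (by rw [← hdropk]; exact h2)]
              split
              · rename_i args' rest' heq
                rw [← hdropk, hm] at heq
                have h6 := Option.some.inj heq
                obtain rfl : args = args' := congrArg Prod.fst h6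
                obtain rfl : rest = rest' := congrArg Prod.snd h6
                rw [hrest]
              · rename_i heq
                rw [← hdropk, hm] at heq
                exact absurd heq (by simp)
            have hSs : scanS (cs.drop k) r (enabledAt cs e0 k)
                = scanS (cs.drop (k + pre.length))
                    (if enabledAt cs e0 k then r ++ [args] else r) (enabledAt cs e0 k) := by
              conv_lhs => rw [hdropk, scanS]
              rw [show matchMulS (cs[k] :: cs.drop (k + 1)) = some (args, rest) from by
                rw [← hdropk]; exact hms]
              simp only
              rw [hrest]
            rw [hLs, hSs, ← heL]
            exact ih (k + pre.length) _ (by omega)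

-- ---- lemmas for the tightness theorem: under D_ the two results differ in length ----

lemma dropWhile_head_false {p : Char → Bool} : ∀ {l : List Char} {x : Char} {xs : List Char},
    l.dropWhile p = x :: xs → p x = false := by
  intro l
  induction l with
  | nil => intro x xs h; simp at h
  | cons c t ih =>
    intro x xs h
    rw [List.dropWhile_cons] at h
    by_cases hc : p c = true
    · rw [if_pos hc] at h
      exact ih h
    · rw [Bool.not_eq_true] at hc
      rw [if_neg (by simp [hc])] at h
      obtain rfl : c = x := (List.cons.injEq .. ▸ h).1
      exact hc

lemma dropWhile_append_of_ne {p : Char → Bool} {l1 : List Char} {x : Char} {xs : List Char}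
    (h : l1.dropWhile p = x :: xs) (l2 : List Char) :
    (l1 ++ l2).dropWhile p = x :: (xs ++ l2) := by
  conv_lhs => rw [← List.takeWhile_append_dropWhile (p := p) (l := l1), h]
  rw [List.append_assoc, dropWhile_app _ _ (fun a ha => List.mem_takeWhile_imp ha)]
  rw [List.cons_append, List.dropWhile_cons, if_neg (by simp [dropWhile_head_false h])]

-- dissect quirkAt into its five facts
lemma quirk_dissect {l : List Char} (hq : quirkAt l = true) :
    l.take 4 = "mul(".toList ∧
    ((l.drop 4).takeWhile pvPD).any PySem.Chars.isdigit = true ∧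
    (∃ r2, (l.drop 4).dropWhile pvPD = ',' :: r2 ∧
      ')' ∈ (r2.takeWhile pvPD).dropWhile (!PySem.Chars.isdigit ·) ∧
      (')' ∈ (l.drop 4).takeWhile pvPD ∨ (r2.takeWhile pvPD).head? = some ')')) := by
  unfold quirkAt at hq
  rw [List.span_eq_takeWhile_dropWhile] at hq
  simp only [Bool.and_eq_true, beq_iff_eq, Bool.or_eq_true, List.contains_eq_mem,
    decide_eq_true_eq] at hq
  obtain ⟨h4, ⟨hany, hhd⟩, hC, hstray⟩ := hq
  rcases hdp : (l.drop 4).dropWhile pvPD with _ | ⟨c0, r2⟩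
  · rw [hdp] at hhd; simp at hhd
  · rw [hdp] at hhd hC hstray
    simp only [List.head?_cons, Option.some.injEq] at hhd
    subst hhd
    simp only [List.drop_succ_cons, List.drop_zero] at hC hstray
    exact ⟨h4, hany, r2, rfl, hC, hstray⟩

lemma quirk_m {cs : List Char} {j : Nat} (hq : quirkAt (cs.drop j) = true) :
    cs[j]? = some 'm' := by
  obtain ⟨h4, -⟩ := quirk_dissect hq
  have hg := getElem?_of_take_eq (k := j) (t := 0) (pat := "mul(".toList)
    (by rw [show ("mul(".toList).length = 4 from by decide]; exact h4) (by decide)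
  rw [show ("mul(".toList)[0]'(by decide) = 'm' from by decide] at hg
  simpa using hg

-- a quirkAt site is accepted by A's lenient matcher …
lemma quirk_lenient {l : List Char} (hq : quirkAt l = true) : (matchMul l).isSome = true := by
  obtain ⟨h4, hany, r2, hdp, hC, -⟩ := quirk_dissect hq
  -- decompose w := r2.takeWhile pvPD around its first digit
  have hz : ∃ b zr, (r2.takeWhile pvPD).dropWhile (!PySem.Chars.isdigit ·) = b :: zr := by
    rcases hz0 : (r2.takeWhile pvPD).dropWhile (!PySem.Chars.isdigit ·) with _ | ⟨b, zr⟩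
    · rw [hz0] at hC; simp at hC
    · exact ⟨b, zr, rfl⟩
  obtain ⟨b, zr, hz⟩ := hz
  have hb : PySem.Chars.isdigit b = true := by
    have := dropWhile_head_false hz
    simpa using this
  have hwsplit : (r2.takeWhile pvPD).takeWhile (!PySem.Chars.isdigit ·) ++ (b :: zr)
      = r2.takeWhile pvPD := by
    rw [← hz]; exact List.takeWhile_append_dropWhile
  have hqmem : ∀ a ∈ (r2.takeWhile pvPD).takeWhile (!PySem.Chars.isdigit ·), a = ')' := by
    intro a ha
    have h1 : (!PySem.Chars.isdigit a) = true :=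
      List.mem_takeWhile_imp (p := (!PySem.Chars.isdigit ·)) ha
    have h2 : pvPD a = true :=
      List.mem_takeWhile_imp ((List.takeWhile_sublist _).subset ha)
    simp only [pvPD, Bool.or_eq_true, beq_iff_eq] at h2
    simp only [Bool.not_eq_eq_eq_not, Bool.not_true] at h1
    rcases h2 with h2 | h2
    · rw [h2] at h1; exact absurd h1 (by simp)
    · exact h2
  have hr2split : ((r2.takeWhile pvPD).takeWhile (!PySem.Chars.isdigit ·) ++ (b :: zr))
      ++ r2.dropWhile pvPD = r2 := by
    rw [hwsplit]; exact List.takeWhile_append_dropWhile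
  -- r2.dropWhile (· = ')') = b :: (zr ++ r2.dropWhile pvPD)
  have hu : r2.dropWhile (· = ')') = b :: (zr ++ r2.dropWhile pvPD) := by
    conv_lhs => rw [← hr2split]
    rw [List.append_assoc, dropWhile_app _ _ (fun a ha => by rw [hqmem a ha]; rfl)]
    rw [List.cons_append, List.dropWhile_cons, if_neg (by
      simp only [decide_eq_true_eq]
      rintro rfl
      exact absurd hb (by decide))]
  have htw : (r2.dropWhile (· = ')')).takeWhile PySem.Chars.isdigit ≠ [] := by
    rw [hu, List.takeWhile_cons, if_pos hb]
    simp
  -- after the digits comes a ')'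
  have hzr : ')' ∈ zr := by
    rw [hz] at hC
    rcases List.mem_cons.1 hC with h | h
    · exfalso; rw [← h] at hb; exact absurd hb (by decide)
    · exact h
  have hzrd : ∃ y ys, zr.dropWhile PySem.Chars.isdigit = y :: ys := by
    rcases hy : zr.dropWhile PySem.Chars.isdigit with _ | ⟨y, ys⟩
    · exfalso
      have := List.dropWhile_eq_nil_iff.1 hy
      have h2 := this ')' hzr
      exact absurd h2 (by decide)
    · exact ⟨y, ys, rfl⟩
  obtain ⟨y, ys, hzrd⟩ := hzrd
  have hy : y = ')' := by
    have h1 : PySem.Chars.isdigit y = false := dropWhile_head_false hzrd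
    have h2 : pvPD y = true := by
      have hmem : y ∈ zr := (List.dropWhile_sublist _).subset (hzrd ▸ List.mem_cons_self)
      have hmemw : y ∈ r2.takeWhile pvPD := by
        rw [← hwsplit]
        exact List.mem_append.2 (Or.inr (List.mem_cons.2 (Or.inr hmem)))
      exact List.mem_takeWhile_imp hmemw
    simp only [pvPD, Bool.or_eq_true, beq_iff_eq] at h2
    rcases h2 with h2 | h2
    · rw [h2] at h1; exact absurd h1 (by simp)
    · exact h2
  have hdw : (r2.dropWhile (· = ')')).dropWhile PySem.Chars.isdigit
      = ')' :: (ys ++ r2.dropWhile pvPD) := by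
    rw [hu, List.dropWhile_cons, if_pos hb, dropWhile_append_of_ne hzrd, hy]
  have hd1 : ((l.drop 4).takeWhile pvPD).filter PySem.Chars.isdigit ≠ [] := by
    obtain ⟨x, hx1, hx2⟩ := List.any_eq_true.1 hany
    exact List.ne_nil_of_mem (List.mem_filter.2 ⟨hx1, hx2⟩)
  unfold matchMul
  rw [if_pos h4, scanArg1_eq (l.drop 4) []]
  simp only [List.nil_append, hdp, hd1, htw, hdw]
  simp [hd1, htw]

-- … and rejected by the strict matcher
lemma quirk_not_strict {l : List Char} (hq : quirkAt l = true) : matchMulS l = none := by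
  obtain ⟨h4, hany, r2, hdp, -, hstray⟩ := quirk_dissect hq
  have hsplit : (l.drop 4).takeWhile pvPD ++ (',' :: r2) = l.drop 4 := by
    rw [← hdp]; exact List.takeWhile_append_dropWhile
  by_cases hmem : ')' ∈ (l.drop 4).takeWhile pvPD
  · -- a stray ')' inside the first argument
    have hne : ((l.drop 4).takeWhile pvPD).dropWhile PySem.Chars.isdigit ≠ [] := by
      intro he
      have := List.dropWhile_eq_nil_iff.1 he ')' hmem
      exact absurd this (by decide)
    rcases hyd : ((l.drop 4).takeWhile pvPD).dropWhile PySem.Chars.isdigit with _ | ⟨y, ys⟩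
    · exact absurd hyd hne
    have hy : y = ')' := by
      have h1 : PySem.Chars.isdigit y = false := dropWhile_head_false hyd
      have h2 : pvPD y = true := by
        have hmemy : y ∈ (l.drop 4).takeWhile pvPD :=
          (List.dropWhile_sublist _).subset (hyd ▸ List.mem_cons_self)
        exact List.mem_takeWhile_imp hmemy
      simp only [pvPD, Bool.or_eq_true, beq_iff_eq] at h2
      rcases h2 with h2 | h2
      · rw [h2] at h1; exact absurd h1 (by simp)
      · exact h2
    have hdwl : (l.drop 4).dropWhile PySem.Chars.isdigit = y :: (ys ++ ',' :: r2) := by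
      conv_lhs => rw [← hsplit]
      exact dropWhile_append_of_ne hyd _
    unfold matchMulS
    rw [if_pos h4]
    simp only [hdwl]
    by_cases hd1 : (l.drop 4).takeWhile PySem.Chars.isdigit = []
    · rw [if_pos hd1]
    · rw [if_neg hd1]
      rw [if_neg (by rw [hy]; decide)]
  · -- the second argument starts with a stray ')'
    have hhd : (r2.takeWhile pvPD).head? = some ')' := by
      rcases hstray with h | h
      · exact absurd h hmem
      · exact h
    have hdigs : ∀ a ∈ (l.drop 4).takeWhile pvPD, PySem.Chars.isdigit a = true := by
      intro a ha
      have hpa : pvPD a = true := List.mem_takeWhile_imp ha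
      have hne : ¬ (a = ')') := fun he => hmem (he ▸ ha)
      simp only [pvPD, Bool.or_eq_true, beq_iff_eq] at hpa
      tauto
    have ht1 : (l.drop 4).takeWhile PySem.Chars.isdigit = (l.drop 4).takeWhile pvPD := by
      conv_lhs => rw [← hsplit]
      rw [takeWhile_app _ _ hdigs]
      simp [List.takeWhile_cons, show PySem.Chars.isdigit ',' = false from by decide]
    have ht2 : (l.drop 4).dropWhile PySem.Chars.isdigit = ',' :: r2 := by
      conv_lhs => rw [← hsplit]
      rw [dropWhile_app _ _ hdigs]
      simp [List.dropWhile_cons, show PySem.Chars.isdigit ',' = false from by decide]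
    have ha1 : (l.drop 4).takeWhile pvPD ≠ [] := by
      obtain ⟨x, hx1, -⟩ := List.any_eq_true.1 hany
      exact List.ne_nil_of_mem hx1
    rcases hr2 : r2 with _ | ⟨h0, r3⟩
    · rw [hr2] at hhd; simp at hhd
    have hh0 : h0 = ')' := by
      rw [hr2, List.takeWhile_cons] at hhd
      by_cases hp : pvPD h0 = true
      · rw [if_pos hp] at hhd
        simpa using hhd
      · rw [if_neg hp] at hhd
        simp at hhd
    have hd2 : r2.takeWhile PySem.Chars.isdigit = [] := by
      rw [hr2, List.takeWhile_cons, if_neg (by rw [hh0]; decide)]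
    unfold matchMulS
    rw [if_pos h4]
    simp only [ht1, ht2]
    rw [if_neg ha1]
    simp only [if_true, ite_true, reduceIte]
    rw [if_pos hd2]

lemma scanL_append : ∀ (n : Nat) (xs : List Char), xs.length ≤ n → ∀ (r : List (List Int)) (e : Bool),
    scanL xs r e = (r ++ (scanL xs [] e).1, (scanL xs [] e).2) := by
  intro n
  induction n with
  | zero =>
    intro xs h r e
    obtain rfl : xs = [] := List.eq_nil_of_length_eq_zero (by omega)
    simp [scanL]
  | succ n ih =>
    intro xs h r e
    cases xs with
    | nil => simp [scanL]
    | cons c t =>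
      by_cases h1 : (c :: t).take 4 = "do()".toList
      · conv_lhs => rw [scanL]
        conv_rhs => rw [scanL]
        rw [if_pos h1, if_pos h1]
        exact ih (t.drop 3) (by simp at h ⊢; omega) r true
      · by_cases h2 : (c :: t).take 7 = "don't()".toList
        · conv_lhs => rw [scanL]
          conv_rhs => rw [scanL]
          rw [if_neg h1, if_pos h2, if_neg h1, if_pos h2]
          exact ih (t.drop 6) (by simp at h ⊢; omega) r false
        · conv_lhs => rw [scanL]
          conv_rhs => rw [scanL]
          rw [if_neg h1, if_neg h2, if_neg h1, if_neg h2]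
          split
          · rename_i a1 r1 heq
            have hlen : r1.length ≤ n := by
              have := matchMul_rest_lt heq
              simp at this h
              omega
            rw [ih r1 hlen (if e then r ++ [a1] else r) e,
              ih r1 hlen (if e then [] ++ [a1] else []) e]
            cases e <;> simp
          · exact ih t (by simp at h; omega) r e

lemma scanS_append : ∀ (n : Nat) (xs : List Char), xs.length ≤ n → ∀ (r : List (List Int)) (e : Bool),
    scanS xs r e = (r ++ (scanS xs [] e).1, (scanS xs [] e).2) := by
  intro n
  induction n with
  | zero =>
    intro xs h r e
    obtain rfl : xs = [] := List.eq_nil_of_length_eq_zero (by omega)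
    simp [scanS]
  | succ n ih =>
    intro xs h r e
    cases xs with
    | nil => simp [scanS]
    | cons c t =>
      conv_lhs => rw [scanS]
      conv_rhs => rw [scanS]
      split
      · rename_i a1 r1 heq
        have hlen : r1.length ≤ n := by
          have := matchMulS_rest_lt heq
          simp at this h
          omega
        rw [ih r1 hlen (if e then r ++ [a1] else r) e,
          ih r1 hlen (if e then [] ++ [a1] else []) e]
        cases e <;> simp
      · by_cases h1 : (c :: t).take 4 = "do()".toList
        · rw [if_pos h1, if_pos h1]
          exact ih (t.drop 3) (by simp at h ⊢; omega) r true
        · by_cases h2 : (c :: t).take 7 = "don't()".toList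
          · rw [if_neg h1, if_pos h2, if_neg h1, if_pos h2]
            exact ih (t.drop 6) (by simp at h ⊢; omega) r false
          · rw [if_neg h1, if_neg h2, if_neg h1, if_neg h2]
            exact ih t (by simp at h; omega) r e

lemma quirkScan_exists : ∀ (cs : List Char) (e0 : Bool), quirkScan cs e0 = true →
    ∃ k, quirkAt (cs.drop k) = true ∧ enabledAt cs e0 k = true := by
  intro cs
  induction cs with
  | nil => intro e0 hq; rw [quirkScan] at hq; exact absurd hq (by simp)
  | cons c t ih =>
    intro e0 hq
    rw [quirkScan] at hq
    by_cases hb : (e0 && quirkAt (c :: t)) = true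
    · rw [Bool.and_eq_true] at hb
      exact ⟨0, hb.2, hb.1⟩
    · rw [if_neg hb] at hq
      obtain ⟨k, hk1, hk2⟩ := ih _ hq
      refine ⟨k + 1, by simpa using hk1, ?_⟩
      rw [enabledAt_cons]
      exact hk2

lemma scanL_len (xs : List Char) (r : List (List Int)) (e : Bool) :
    (scanL xs r e).1.length = r.length + (scanL xs [] e).1.length := by
  rw [scanL_append xs.length xs le_rfl r e]
  simp

lemma scanS_len (xs : List Char) (r : List (List Int)) (e : Bool) :
    (scanS xs r e).1.length = r.length + (scanS xs [] e).1.length := by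
  rw [scanS_append xs.length xs le_rfl r e]
  simp

-- the counting simulation: scanL collects at least as many pairs as scanS, and strictly
-- more as soon as an enabled quirky site remains
lemma sim3 (cs : List Char) (e0 : Bool) : ∀ (N k : Nat), cs.length ≤ k + N →
    ((scanS (cs.drop k) [] (enabledAt cs e0 k)).1.length
      ≤ (scanL (cs.drop k) [] (enabledAt cs e0 k)).1.length)
    ∧ ((∃ j, k ≤ j ∧ quirkAt (cs.drop j) = true ∧ enabledAt cs e0 j = true) →
      (scanS (cs.drop k) [] (enabledAt cs e0 k)).1.length
        < (scanL (cs.drop k) [] (enabledAt cs e0 k)).1.length) := by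
  intro N
  induction N with
  | zero =>
    intro k h
    constructor
    · rw [List.drop_eq_nil_of_le (by omega)]
      simp [scanL, scanS]
    · rintro ⟨j, hj1, hj2, -⟩
      rw [List.drop_eq_nil_of_le (show cs.length ≤ j by omega)] at hj2
      exact absurd hj2 (by decide)
  | succ N ih =>
    intro k h
    by_cases hk : cs.length ≤ k
    · constructor
      · rw [List.drop_eq_nil_of_le hk]; simp [scanL, scanS]
      · rintro ⟨j, hj1, hj2, -⟩
        rw [List.drop_eq_nil_of_le (show cs.length ≤ j by omega)] at hj2
        exact absurd hj2 (by decide)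
    push_neg at hk
    have hdropk : cs.drop k = cs[k] :: cs.drop (k + 1) := List.drop_eq_getElem_cons hk
    by_cases h1 : (cs.drop k).take 4 = "do()".toList
    · -- ---- do() ----
      have h1' : (cs.drop k).take ("do()".toList.length) = "do()".toList := by
        rw [show ("do()".toList).length = 4 from by decide]; exact h1
      have h4k : k + 4 ≤ cs.length := by
        have h2 := congrArg List.length h1
        rw [List.length_take, List.length_drop] at h2
        simp at h2; omega
      have he4 : enabledAt cs e0 (k + 4) = true := by
        rw [show k + 4 = (k + 1) + 3 from by omega,
          enabledAt_skip cs e0 3 (k + 1)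
            (fun j hj1 hj2 => pat_no_d h1' (by decide) j hj1
              (by rw [show ("do()".toList).length = 4 from by decide]; omega)),
          enabledAt_succ, if_pos ((pfx_take _ _).2 h1')]
      have hmm : matchMulS (cs.drop k) = none := by
        rcases hms : matchMulS (cs.drop k) with _ | v
        · rfl
        · exfalso
          have := matchMulS_take4 hms
          rw [h1] at this
          exact absurd this (by decide)
      have hdd : (cs.drop (k + 1)).drop 3 = cs.drop (k + 4) := by rw [List.drop_drop]
      have hLs : scanL (cs.drop k) [] (enabledAt cs e0 k)
          = scanL (cs.drop (k + 4)) [] (enabledAt cs e0 (k + 4)) := by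
        conv_lhs => rw [hdropk, scanL]
        rw [if_pos (by rw [← hdropk]; exact h1), hdd, he4]
      have hSs : scanS (cs.drop k) [] (enabledAt cs e0 k)
          = scanS (cs.drop (k + 4)) [] (enabledAt cs e0 (k + 4)) := by
        conv_lhs => rw [hdropk, scanS]
        rw [show matchMulS (cs[k] :: cs.drop (k + 1)) = none from by rw [← hdropk]; exact hmm]
        simp only
        rw [if_pos (by rw [← hdropk]; exact h1), hdd, he4]
      have hno_m : ∀ j, k ≤ j → j < k + 4 → cs[j]? ≠ some 'm' := by
        intro j hj1 hj2
        obtain ⟨t, rfl, ht2⟩ : ∃ t, j = k + t ∧ t < "do()".toList.length :=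
          ⟨j - k, by omega, by rw [show ("do()".toList).length = 4 from by decide]; omega⟩
        rw [getElem?_of_take_eq h1' ht2]
        intro hc
        have hmem : 'm' ∈ "do()".toList := Option.some.inj hc ▸ List.getElem_mem _
        exact absurd hmem (by decide)
      refine ⟨?_, ?_⟩
      · rw [hLs, hSs]
        exact (ih (k + 4) (by omega)).1
      · rintro ⟨j, hj1, hj2, hj3⟩
        have hj4 : k + 4 ≤ j := by
          by_contra hlt
          push_neg at hlt
          exact hno_m j hj1 hlt (quirk_m hj2)
        rw [hLs, hSs]
        exact (ih (k + 4) (by omega)).2 ⟨j, by omega, hj2, hj3⟩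
    · by_cases h2 : (cs.drop k).take 7 = "don't()".toList
      · -- ---- don't() ----
        have h2' : (cs.drop k).take ("don't()".toList.length) = "don't()".toList := by
          rw [show ("don't()".toList).length = 7 from by decide]; exact h2
        have h7k : k + 7 ≤ cs.length := by
          have h3 := congrArg List.length h2
          rw [List.length_take, List.length_drop] at h3
          simp at h3; omega
        have hnd1 : ¬ ("do()".toList.isPrefixOf (cs.drop k) = true) := by
          intro hp
          exact h1 (by
            have := (pfx_take _ _).1 hp
            rwa [show ("do()".toList).length = 4 from by decide] at this)
        have he7 : enabledAt cs e0 (k + 7) = false := by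
          rw [show k + 7 = (k + 1) + 6 from by omega,
            enabledAt_skip cs e0 6 (k + 1)
              (fun j hj1 hj2 => pat_no_d h2' (by decide) j hj1
                (by rw [show ("don't()".toList).length = 7 from by decide]; omega)),
            enabledAt_succ, if_neg hnd1, if_pos ((pfx_take _ _).2 h2')]
        have hmm : matchMulS (cs.drop k) = none := by
          rcases hms : matchMulS (cs.drop k) with _ | v
          · rfl
          · exfalso
            have h4' := matchMulS_take4 hms
            have g1 := getElem?_of_take_eq
              (pat := "mul(".toList)
              (by rw [show ("mul(".toList).length = 4 from by decide]; exact h4')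
              (show (0:Nat) < "mul(".toList.length from by decide)
            have g2 := getElem?_of_take_eq h2' (show (0:Nat) < "don't()".toList.length from by decide)
            rw [show ("mul(".toList)[0]'(by decide) = 'm' from by decide] at g1
            rw [show ("don't()".toList)[0]'(by decide) = 'd' from by decide] at g2
            simp at g1 g2
            rw [g1] at g2
            exact absurd g2 (by decide)
        have hdd : (cs.drop (k + 1)).drop 6 = cs.drop (k + 7) := by rw [List.drop_drop]
        have hLs : scanL (cs.drop k) [] (enabledAt cs e0 k)
            = scanL (cs.drop (k + 7)) [] (enabledAt cs e0 (k + 7)) := by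
          conv_lhs => rw [hdropk, scanL]
          rw [if_neg (by rw [← hdropk]; exact h1), if_pos (by rw [← hdropk]; exact h2), hdd, he7]
        have hSs : scanS (cs.drop k) [] (enabledAt cs e0 k)
            = scanS (cs.drop (k + 7)) [] (enabledAt cs e0 (k + 7)) := by
          conv_lhs => rw [hdropk, scanS]
          rw [show matchMulS (cs[k] :: cs.drop (k + 1)) = none from by rw [← hdropk]; exact hmm]
          simp only
          rw [if_neg (by rw [← hdropk]; exact h1), if_pos (by rw [← hdropk]; exact h2), hdd, he7]
        have hno_m : ∀ j, k ≤ j → j < k + 7 → cs[j]? ≠ some 'm' := by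
          intro j hj1 hj2
          obtain ⟨t, rfl, ht2⟩ : ∃ t, j = k + t ∧ t < "don't()".toList.length :=
            ⟨j - k, by omega, by rw [show ("don't()".toList).length = 7 from by decide]; omega⟩
          rw [getElem?_of_take_eq h2' ht2]
          intro hc
          have hmem : 'm' ∈ "don't()".toList := Option.some.inj hc ▸ List.getElem_mem _
          exact absurd hmem (by decide)
        refine ⟨?_, ?_⟩
        · rw [hLs, hSs]
          exact (ih (k + 7) (by omega)).1
        · rintro ⟨j, hj1, hj2, hj3⟩
          have hj4 : k + 7 ≤ j := by
            by_contra hlt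
            push_neg at hlt
            exact hno_m j hj1 hlt (quirk_m hj2)
          rw [hLs, hSs]
          exact (ih (k + 7) (by omega)).2 ⟨j, by omega, hj2, hj3⟩
      · have he1 : enabledAt cs e0 (k + 1) = enabledAt cs e0 k := by
          rw [enabledAt_succ,
            if_neg (show ¬ ("do()".toList.isPrefixOf (cs.drop k) = true) from by
              intro hp
              exact h1 (by
                have := (pfx_take _ _).1 hp
                rwa [show ("do()".toList).length = 4 from by decide] at this)),
            if_neg (show ¬ ("don't()".toList.isPrefixOf (cs.drop k) = true) from by
              intro hp
              exact h2 (by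
                have := (pfx_take _ _).1 hp
                rwa [show ("don't()".toList).length = 7 from by decide] at this))]
        rcases hm : matchMul (cs.drop k) with _ | ⟨args, rest⟩
        · -- ---- nothing matches: both advance one ----
          have hmm : matchMulS (cs.drop k) = none := by
            rcases hms : matchMulS (cs.drop k) with _ | v
            · rfl
            · rw [matchMul_of_matchMulS hms] at hm; exact absurd hm (by simp)
          have hLs : scanL (cs.drop k) [] (enabledAt cs e0 k)
              = scanL (cs.drop (k + 1)) [] (enabledAt cs e0 (k + 1)) := by
            conv_lhs => rw [hdropk, scanL]
            rw [if_neg (by rw [← hdropk]; exact h1), if_neg (by rw [← hdropk]; exact h2), he1]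
            split
            · rename_i args' rest' heq
              rw [← hdropk, hm] at heq
              simp at heq
            · rfl
          have hSs : scanS (cs.drop k) [] (enabledAt cs e0 k)
              = scanS (cs.drop (k + 1)) [] (enabledAt cs e0 (k + 1)) := by
            conv_lhs => rw [hdropk, scanS]
            rw [show matchMulS (cs[k] :: cs.drop (k + 1)) = none from by rw [← hdropk]; exact hmm]
            simp only
            rw [if_neg (by rw [← hdropk]; exact h1), if_neg (by rw [← hdropk]; exact h2), he1]
          have hqk : quirkAt (cs.drop k) ≠ true := by
            intro hq
            have := quirk_lenient hq
            rw [hm] at this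
            exact absurd this (by simp)
          refine ⟨?_, ?_⟩
          · rw [hLs, hSs]
            exact (ih (k + 1) (by omega)).1
          · rintro ⟨j, hj1, hj2, hj3⟩
            have hj4 : k + 1 ≤ j := by
              rcases Nat.eq_or_lt_of_le hj1 with rfl | hlt
              · exact absurd hj2 hqk
              · omega
            rw [hLs, hSs]
            exact (ih (k + 1) (by omega)).2 ⟨j, by omega, hj2, hj3⟩
        · -- a lenient mul match at k
          obtain ⟨h4m, pre, hpre, hplen, hpmem⟩ := matchMul_spec hm
          have hL : k + pre.length ≤ cs.length := by
            have h3 := congrArg List.length hpre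
            rw [List.length_drop, List.length_append] at h3
            omega
          have hrest : cs.drop (k + pre.length) = rest := by
            rw [← List.drop_drop, hpre, List.drop_left]
          obtain ⟨hnod, hnomd⟩ := region_no_md hpre h4m hL hpmem
          have heL : enabledAt cs e0 (k + pre.length) = enabledAt cs e0 k :=
            enabledAt_skip cs e0 pre.length k hnod
          have hjge : ∀ j, k < j → quirkAt (cs.drop j) = true → k + pre.length ≤ j := by
            intro j hj1 hj2
            by_contra hlt
            push_neg at hlt
            exact (hnomd j hj1 hlt).2 (quirk_m hj2)
          have hLs : scanL (cs.drop k) [] (enabledAt cs e0 k)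
              = scanL (cs.drop (k + pre.length))
                  (if enabledAt cs e0 k then [] ++ [args] else []) (enabledAt cs e0 k) := by
            conv_lhs => rw [hdropk, scanL]
            rw [if_neg (by rw [← hdropk]; exact h1), if_neg (by rw [← hdropk]; exact h2)]
            split
            · rename_i args' rest' heq
              rw [← hdropk, hm] at heq
              have h6 := Option.some.inj heq
              obtain rfl : args = args' := congrArg Prod.fst h6
              obtain rfl : rest = rest' := congrArg Prod.snd h6
              rw [hrest]
            · rename_i heq
              rw [← hdropk, hm] at heq
              exact absurd heq (by simp)
          have haC : (scanL (cs.drop k) [] (enabledAt cs e0 k)).1.length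
              = (if enabledAt cs e0 k then 1 else 0)
                + (scanL (cs.drop (k + pre.length)) [] (enabledAt cs e0 (k + pre.length))).1.length := by
            rw [hLs, scanL_len, heL]
            cases enabledAt cs e0 k <;> simp
          rcases hms : matchMulS (cs.drop k) with _ | ⟨args', rest'⟩
          · -- ---- quirky site ----
            have hSs : scanS (cs.drop k) [] (enabledAt cs e0 k)
                = scanS (cs.drop (k + pre.length)) [] (enabledAt cs e0 (k + pre.length)) := by
              rw [heL]
              exact scanS_skip cs k h1 h2 hms hpre h4m hL hpmem [] (enabledAt cs e0 k)
            by_cases he : enabledAt cs e0 k = true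
            · -- enabled quirky site: scanL gains one pair scanS never sees
              have hlt : (scanS (cs.drop k) [] (enabledAt cs e0 k)).1.length
                  < (scanL (cs.drop k) [] (enabledAt cs e0 k)).1.length := by
                rw [haC, hSs, he]
                have := (ih (k + pre.length) (by omega)).1
                simp
                omega
              exact ⟨le_of_lt hlt, fun _ => hlt⟩
            · -- disabled quirky site: equal counts, site contributes nothing
              rw [Bool.not_eq_true] at he
              refine ⟨?_, ?_⟩
              · rw [haC, hSs, he]
                simpa using (ih (k + pre.length) (by omega)).1
              · rintro ⟨j, hj1, hj2, hj3⟩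
                have hj4 : k + pre.length ≤ j := by
                  rcases Nat.eq_or_lt_of_le hj1 with rfl | hlt
                  · rw [he] at hj3; exact absurd hj3 (by simp)
                  · exact hjge j hlt hj2
                rw [haC, hSs, he]
                simpa using (ih (k + pre.length) (by omega)).2 ⟨j, by omega, hj2, hj3⟩
          · -- ---- strict site: both collect the same pair ----
            have hq0 : quirkAt (cs.drop k) ≠ true := by
              intro hq
              rw [quirk_not_strict hq] at hms
              exact absurd hms (by simp)
            have hms2 : matchMul (cs.drop k) = some (args', rest') := matchMul_of_matchMulS hms
            rw [hm] at hms2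
            have h6 := Option.some.inj hms2
            obtain rfl : args = args' := congrArg Prod.fst h6
            obtain rfl : rest = rest' := congrArg Prod.snd h6
            have hSs : scanS (cs.drop k) [] (enabledAt cs e0 k)
                = scanS (cs.drop (k + pre.length))
                    (if enabledAt cs e0 k then [] ++ [args] else []) (enabledAt cs e0 k) := by
              conv_lhs => rw [hdropk, scanS]
              rw [show matchMulS (cs[k] :: cs.drop (k + 1)) = some (args, rest) from by
                rw [← hdropk]; exact hms]
              simp only
              rw [hrest]
            have hbC : (scanS (cs.drop k) [] (enabledAt cs e0 k)).1.length
                = (if enabledAt cs e0 k then 1 else 0)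
                  + (scanS (cs.drop (k + pre.length)) [] (enabledAt cs e0 (k + pre.length))).1.length := by
              rw [hSs, scanS_len, heL]
              cases enabledAt cs e0 k <;> simp
            refine ⟨?_, ?_⟩
            · rw [haC, hbC]
              have := (ih (k + pre.length) (by omega)).1
              omega
            · rintro ⟨j, hj1, hj2, hj3⟩
              have hj4 : k + pre.length ≤ j := by
                rcases Nat.eq_or_lt_of_le hj1 with rfl | hlt
                · exact absurd hj2 hq0
                · exact hjge j hlt hj2
              have := (ih (k + pre.length) (by omega)).2 ⟨j, by omega, hj2, hj3⟩
              rw [haC, hbC]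
              omega

-- ===== VERDICT (by name: the statement is the Claim_ definition above) =====
theorem find_muls_part2_spec : Claim_unchanged_find_muls_part2 := by
  intro instructions mul_enabled _
  unfold Spec_find_muls_part2
  intro hnd
  have hA : find_muls_part2 instructions mul_enabled
      = scanL instructions.toList [] mul_enabled := by
    unfold find_muls_part2
    have h := main_sim instructions.toList instructions.toList.length 0 ([], mul_enabled) (by omega)
    simpa [PySem.Str.len_eq, PySem.Chars.len_eq] using h
  have H : ∀ k, k < instructions.toList.length →
      quirkAt (instructions.toList.drop k) = true →
      enabledAt instructions.toList mul_enabled k = false := by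
    intro k hk hq
    have hsc : quirkScan instructions.toList mul_enabled = false := by
      rw [← Bool.not_eq_true]
      exact hnd
    have := quirkScan_suffix instructions.toList mul_enabled hsc k
    rw [hq, Bool.and_true] at this
    exact this
  have h2 := sim2 instructions.toList mul_enabled H instructions.toList.length 0 [] (by omega)
  rw [List.drop_zero] at h2
  rw [show enabledAt instructions.toList mul_enabled 0 = mul_enabled from rfl] at h2
  rw [hA]
  unfold find_muls_part2_alt
  exact h2

theorem find_muls_part2_tight : Claim_exact_find_muls_part2 := by
  intro instructions mul_enabled _ hd
  unfold D_find_muls_part2 at hd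
  obtain ⟨j, hj2, hj3⟩ := quirkScan_exists instructions.toList mul_enabled hd
  have hA : find_muls_part2 instructions mul_enabled
      = scanL instructions.toList [] mul_enabled := by
    unfold find_muls_part2
    have h := main_sim instructions.toList instructions.toList.length 0 ([], mul_enabled) (by omega)
    simpa [PySem.Str.len_eq, PySem.Chars.len_eq] using h
  have h3 := (sim3 instructions.toList mul_enabled instructions.toList.length 0 (by omega)).2
    ⟨j, by omega, hj2, hj3⟩
  rw [List.drop_zero] at h3
  rw [show enabledAt instructions.toList mul_enabled 0 = mul_enabled from rfl] at h3
  rw [hA]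
  unfold find_muls_part2_alt
  intro he
  rw [he] at h3
  exact lt_irrefl _ h3

theorem find_muls_part2_changed : Claim_changed_find_muls_part2 := by
  unfold Claim_changed_find_muls_part2
  refine ⟨by decide, by decide, by decide, ?_, by decide⟩
  show find_muls_part2_alt "mul(1),2)" true = ([], true)
  unfold find_muls_part2_alt
  have hw := scanS_walk ("mul(1),2)".toList) 9 0 [] true (by decide)
    (by intro j h1 h2; interval_cases j <;> exact ⟨by decide, by decide, by decide⟩)
  rw [List.drop_zero] at hw
  rw [hw]
  rw [show ("mul(1),2)".toList).drop (0 + 9) = [] from by decide]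
  simp [scanS]
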